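-- pv_equiv track=rewrite | github.com/feiwu77777/simple_AL | utils.py | balance_classes
-- ===== SOURCE A (Python) =====
-- def balance_classes(img_per_class, total_additional_imgs=10, n_class=12, start=0):
--     # make copy of img_per_class
--     img_dict = img_per_class.copy()
--     for class_id in range(start, n_class):
--         if class_id not in img_dict:
--             img_dict[class_id] = 0
--
--     added_imgs = {}
--     while True:
--         least_class, img_count = sorted(img_dict.items(), key=lambda x: x[1])[0]
--
--         # If we've added all the images we can, stop
--         if total_additional_imgs <= 0:
--             return added_imgs, img_dict
--
--         # Add an image to the current class
--         img_dict[least_class] += 1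
--         total_additional_imgs -= 1
--
--         # If the class is already in the dictionary, increment the count
--         if least_class in added_imgs:
--             added_imgs[least_class] += 1
--         # Otherwise, add the class to the dictionary with a count of 1
--         else:
--             added_imgs[least_class] = 1
-- ===== SOURCE B (Python) =====
-- def balance_classes(img_per_class, total_additional_imgs=10, n_class=12, start=0):
--     # closed-form water-filling: one sort + prefix arithmetic instead of T greedy steps
--     img_dict = img_per_class.copy()
--     for class_id in range(start, n_class):
--         if class_id not in img_dict:
--             img_dict[class_id] = 0
--     if total_additional_imgs <= 0:
--         return {}, img_dict
--     items = list(img_dict.items())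
--     n = len(items)
--     idx_sorted = sorted(range(n), key=lambda i: items[i][1])
--     counts = [items[i][1] for i in idx_sorted]
--     T = total_additional_imgs
--     k, level = 1, counts[0]
--     while k < n and counts[k] <= level + T // k:
--         T -= k * (counts[k] - level)
--         level = counts[k]
--         k += 1
--     level += T // k
--     r = T % k
--     active = sorted(idx_sorted[:k])
--     extra = set(active[:r])
--     added_imgs = {}
--     for i in idx_sorted[:k]:
--         key, cnt = items[i]
--         gain = level - cnt + (1 if i in extra else 0)
--         if gain > 0:
--             added_imgs[key] = gain
--         img_dict[key] = cnt + gain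
--     return added_imgs, img_dict
-- ===== Notes on version B (the rewrite author's own statement) =====
-- stated objective: faster
-- what changed: A simulates every one of the T additions separately, re-sorting the whole dict each step; B sorts the counts once, computes the final water-filling level and remainder in closed form by prefix arithmetic over the sorted counts, and writes added_imgs and the updated img_dict in a single output pass.
import Mathlib
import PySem

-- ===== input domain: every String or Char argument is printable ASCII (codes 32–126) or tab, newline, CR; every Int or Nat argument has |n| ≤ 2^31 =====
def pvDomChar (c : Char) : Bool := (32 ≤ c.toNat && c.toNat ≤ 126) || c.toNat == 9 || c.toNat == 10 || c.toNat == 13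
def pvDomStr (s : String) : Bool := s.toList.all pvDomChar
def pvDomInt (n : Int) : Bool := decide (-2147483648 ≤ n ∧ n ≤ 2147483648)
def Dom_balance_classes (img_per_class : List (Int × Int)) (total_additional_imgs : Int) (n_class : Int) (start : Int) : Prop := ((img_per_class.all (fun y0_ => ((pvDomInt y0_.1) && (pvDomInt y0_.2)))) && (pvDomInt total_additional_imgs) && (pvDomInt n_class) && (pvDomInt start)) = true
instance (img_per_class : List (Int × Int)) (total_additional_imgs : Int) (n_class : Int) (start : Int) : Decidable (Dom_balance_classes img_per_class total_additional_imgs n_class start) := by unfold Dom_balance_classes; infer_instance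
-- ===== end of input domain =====

-- A simulates every addition one at a time, re-sorting the dict each step; B sorts the
-- counts once and computes the final water-filling level and remainder in closed form,
-- then writes both result dicts in one pass (asymptotically faster in the image budget).

-- ===== PORT A =====
-- the for-loop adding the missing classes start..n_class-1 with count 0
def pvA_build (d : PySem.Dict Int Int) (cs : List Int) : PySem.Dict Int Int :=
  cs.foldl (fun d c => if d.contains c then d else d.insert c 0) d

-- the `while True` loop; fuel = total_additional_imgs.toNat (the loop body runs exactly
-- total_additional_imgs times before `total_additional_imgs <= 0` returns)
def pvA_loop (fuel : Nat) (added d : PySem.Dict Int Int) (t : Int) :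
    PySem.Dict Int Int × PySem.Dict Int Int :=
  match fuel with
  | 0 => (added, d)
  | fuel + 1 =>
    match (PySem.List.sorted d.items (fun x => x.2)).head? with
    | none => (added, d)  -- sorted(...)[0] raises IndexError (empty dict); excluded by Pre_
    | some lcp =>
      if t ≤ 0 then (added, d)
      else
        pvA_loop fuel
          (if added.contains lcp.1 then added.insert lcp.1 (added.getD lcp.1 0 + 1)
           else added.insert lcp.1 1)
          (d.insert lcp.1 (d.getD lcp.1 0 + 1)) (t - 1)

def balance_classes (img_per_class : List (Int × Int)) (total_additional_imgs : Int) (n_class : Int) (start : Int) : (List (Int × Int)) × (List (Int × Int)) :=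
  let img_dict := pvA_build ⟨img_per_class⟩ (PySem.List.pyRange start n_class)
  let r := pvA_loop total_additional_imgs.toNat ⟨[]⟩ img_dict total_additional_imgs
  (r.1.items, r.2.items)

-- ===== PORT B =====
-- the same padding loop Source B starts with
def pvB_build (d : PySem.Dict Int Int) (cs : List Int) : PySem.Dict Int Int :=
  cs.foldl (fun d c => if d.contains c then d else d.insert c 0) d

-- `while k < n and counts[k] <= level + T // k: ...`; the loop runs at most n-1 times,
-- fuel = counts.length suffices
def pvB_fill (fuel : Nat) (counts : List Int) (k level T : Int) : Int × Int × Int :=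
  match fuel with
  | 0 => (k, level, T)
  | fuel + 1 =>
    if k < PySem.List.len counts ∧
        (PySem.List.pyGet? counts k).getD 0 ≤ level + PySem.Int.floordiv T k then
      pvB_fill fuel counts (k + 1) ((PySem.List.pyGet? counts k).getD 0)
        (T - k * ((PySem.List.pyGet? counts k).getD 0 - level))
    else (k, level, T)

-- everything after the while loop: final level, remainder, the extra set, and the single
-- output pass building added_imgs and updating img_dict
def pvB_finish (items : List (Int × Int)) (idx_sorted : List Int)
    (img_dict : PySem.Dict Int Int) (klt : Int × Int × Int) :
    (List (Int × Int)) × (List (Int × Int)) :=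
  let k := klt.1
  let level := klt.2.1 + PySem.Int.floordiv klt.2.2 klt.1
  let r := PySem.Int.mod klt.2.2 klt.1
  let active := PySem.List.sorted (PySem.List.slice idx_sorted none (some k)) (fun x => x)
  let extra : PySem.Set Int := PySem.Set.ofList (PySem.List.slice active none (some r))
  let res := (PySem.List.slice idx_sorted none (some k)).foldl
    (fun (st : PySem.Dict Int Int × PySem.Dict Int Int) i =>
      let kc := (PySem.List.pyGet? items i).getD (0, 0)
      let gain := level - kc.2 + (if extra.contains i then 1 else 0)
      ((if 0 < gain then st.1.insert kc.1 gain else st.1), st.2.insert kc.1 (kc.2 + gain)))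
    (⟨[]⟩, img_dict)
  (res.1.items, res.2.items)

def balance_classes_alt (img_per_class : List (Int × Int)) (total_additional_imgs : Int) (n_class : Int) (start : Int) : (List (Int × Int)) × (List (Int × Int)) :=
  let img_dict := pvB_build ⟨img_per_class⟩ (PySem.List.pyRange start n_class)
  if total_additional_imgs ≤ 0 then ([], img_dict.items)
  else
    let items := img_dict.items
    let idx_sorted := PySem.List.sorted (PySem.List.pyRange 0 (PySem.List.len items))
      (fun i => ((PySem.List.pyGet? items i).getD (0, 0)).2)
    let counts := idx_sorted.map (fun i => ((PySem.List.pyGet? items i).getD (0, 0)).2)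
    pvB_finish items idx_sorted img_dict
      (pvB_fill counts.length counts 1 ((PySem.List.pyGet? counts 0).getD 0) total_additional_imgs)

-- ===== PRECONDITION & SPEC =====
-- Pre_ excludes (i) association lists with duplicate keys, which do not arise from a Python
-- dict argument, and (ii) the empty padded dict (img_per_class empty and n_class ≤ start),
-- on which A's sorted(...)[0] raises IndexError.
def Pre_balance_classes (img_per_class : List (Int × Int)) (total_additional_imgs : Int) (n_class : Int) (start : Int) : Prop :=
  (img_per_class.map Prod.fst).Nodup ∧ (img_per_class ≠ [] ∨ start < n_class)
instance (img_per_class : List (Int × Int)) (total_additional_imgs : Int) (n_class : Int) (start : Int) : Decidable (Pre_balance_classes img_per_class total_additional_imgs n_class start) := by unfold Pre_balance_classes; infer_instance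

def pvWitness_balance_classes : (List (Int × Int)) × Int × Int × Int := ([(0, 1), (5, 3)], 5, 3, 0)

def Spec_balance_classes (img_per_class : List (Int × Int)) (total_additional_imgs : Int) (n_class : Int) (start : Int) (out : (List (Int × Int)) × (List (Int × Int))) : Prop := out = balance_classes_alt img_per_class total_additional_imgs n_class start
instance (img_per_class : List (Int × Int)) (total_additional_imgs : Int) (n_class : Int) (start : Int) (out : (List (Int × Int)) × (List (Int × Int))) : Decidable (Spec_balance_classes img_per_class total_additional_imgs n_class start out) := by unfold Spec_balance_classes; infer_instance

-- ===== CLAIM (what is proved, stated in full; the proofs are below) =====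
def Claim_equal_balance_classes : Prop := ∀ (img_per_class : List (Int × Int)) (total_additional_imgs : Int) (n_class : Int) (start : Int), Dom_balance_classes img_per_class total_additional_imgs n_class start → Pre_balance_classes img_per_class total_additional_imgs n_class start → Spec_balance_classes img_per_class total_additional_imgs n_class start (balance_classes img_per_class total_additional_imgs n_class start)


-- ===== LEMMAS AND PROOFS =====


-- proof-side: the first-index argmin scan and the array form of A's greedy loop
def pvArgmin (counts : List Int) : Nat :=
  (PySem.List.pyRange 1 (counts.length : Int)).foldl
    (fun m i => if counts.getD i.toNat 0 < counts.getD m 0 then i.toNat else m) 0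

def pvG_loop (fuel : Nat) (keys counts adds : List Int) (order : List Nat) :
    (List (Int × Int)) × (List (Int × Int)) :=
  match fuel with
  | 0 => (order.map (fun i => (keys.getD i 0, adds.getD i 0)), keys.zip counts)
  | fuel + 1 =>
    let m := pvArgmin counts
    pvG_loop fuel keys (counts.set m (counts.getD m 0 + 1))
      (adds.set m (adds.getD m 0 + 1))
      (if adds.getD m 0 == 0 then order ++ [m] else order)

theorem pv_getD_set_ne {α : Type} (l : List α) (i n : Nat) (v d : α) (h : i ≠ n) :
    (l.set n v).getD i d = l.getD i d := by
  rcases lt_or_ge i l.length with hi | hi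
  · rw [List.getD_eq_getElem _ _ (by simpa using hi), List.getD_eq_getElem _ _ hi,
      List.getElem_set_ne (by omega)]
  · rw [List.getD_eq_default _ _ (by simpa using hi), List.getD_eq_default _ _ hi]

theorem pv_argmin_fold_aux (rng : List Int) : ∀ (C : List Int) (x : Int) (m : Nat),
    m < C.length → (∀ i ∈ rng, 0 ≤ i ∧ i < (C.length : Int)) →
    rng.foldl (fun m i => if (C ++ [x]).getD i.toNat 0 < (C ++ [x]).getD m 0 then i.toNat else m) m
      = rng.foldl (fun m i => if C.getD i.toNat 0 < C.getD m 0 then i.toNat else m) m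
    ∧ rng.foldl (fun m i => if C.getD i.toNat 0 < C.getD m 0 then i.toNat else m) m < C.length := by
  induction rng with
  | nil => intro C x m hm _; exact ⟨rfl, hm⟩
  | cons i rng ih =>
    intro C x m hm hb
    obtain ⟨h0, hlt⟩ := hb i (by simp)
    have hit : i.toNat < C.length := by omega
    have h1 : (C ++ [x]).getD i.toNat 0 = C.getD i.toNat 0 := List.getD_append _ _ _ _ hit
    have h2 : (C ++ [x]).getD m 0 = C.getD m 0 := List.getD_append _ _ _ _ hm
    simp only [List.foldl_cons, h1, h2]
    by_cases hc : C.getD i.toNat 0 < C.getD m 0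
    · simp only [if_pos hc]
      exact ih C x i.toNat hit (fun j hj => hb j (by simp [hj]))
    · simp only [if_neg hc]
      exact ih C x m hm (fun j hj => hb j (by simp [hj]))

theorem pv_argmin_lt (C : List Int) (h : C ≠ []) : pvArgmin C < C.length := by
  have hlen : 0 < C.length := List.length_pos_iff.mpr h
  exact (pv_argmin_fold_aux (PySem.List.pyRange 1 (C.length : Int)) C 0 0 hlen
    (fun i hi => by
      have := PySem.List.mem_pyRange_one.mp hi
      exact ⟨by omega, this.2⟩)).2

theorem pv_argmin_snoc (C : List Int) (x : Int) (h : C ≠ []) :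
    pvArgmin (C ++ [x]) =
      if x < C.getD (pvArgmin C) 0 then C.length else pvArgmin C := by
  have hlen : 0 < C.length := List.length_pos_iff.mpr h
  have hr : PySem.List.pyRange 1 ((C ++ [x]).length : Int)
      = PySem.List.pyRange 1 (C.length : Int) ++ [(C.length : Int)] := by
    have : ((C ++ [x]).length : Int) = (C.length : Int) + 1 := by simp
    rw [this, PySem.List.pyRange_one_succ_right (by exact_mod_cast hlen)]
  unfold pvArgmin
  rw [hr, List.foldl_append]
  have haux := pv_argmin_fold_aux (PySem.List.pyRange 1 (C.length : Int)) C x 0 hlen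
    (fun i hi => by
      have := PySem.List.mem_pyRange_one.mp hi
      exact ⟨by omega, this.2⟩)
  rw [haux.1]
  set m := (PySem.List.pyRange 1 (C.length : Int)).foldl
    (fun m i => if C.getD i.toNat 0 < C.getD m 0 then i.toNat else m) 0 with hmdef
  have hm : m < C.length := haux.2
  simp only [List.foldl_cons, List.foldl_nil]
  have e1 : (C ++ [x]).getD (C.length : Int).toNat 0 = x := by
    rw [Int.toNat_natCast, List.getD_append_right _ _ _ _ (le_refl _)]
    simp
  have e2 : (C ++ [x]).getD m 0 = C.getD m 0 := List.getD_append _ _ _ _ hm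
  rw [e1, e2, Int.toNat_natCast]

theorem pv_min?_argmin (l : List (Int × Int)) (h : l ≠ []) :
    PySem.List.min? l (fun x => x.2) =
      some ((l.map Prod.fst).getD (pvArgmin (l.map Prod.snd)) 0,
            (l.map Prod.snd).getD (pvArgmin (l.map Prod.snd)) 0) := by
  induction l using List.reverseRecOn with
  | nil => exact absurd rfl h
  | append_singleton l p ih =>
    rcases eq_or_ne l [] with rfl | hl
    · have : pvArgmin [p.2] = 0 := by
        unfold pvArgmin
        norm_num [PySem.List.pyRange]
      simp [this, PySem.List.min?]
    · have hC : l.map Prod.snd ≠ [] := by simpa using hl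
      have hlt := pv_argmin_lt (l.map Prod.snd) hC
      have hml := ih hl
      have hm : PySem.List.min? (l ++ [p]) (fun x => x.2)
          = if p.2 < (l.map Prod.snd).getD (pvArgmin (l.map Prod.snd)) 0 then some p
            else some ((l.map Prod.fst).getD (pvArgmin (l.map Prod.snd)) 0,
                       (l.map Prod.snd).getD (pvArgmin (l.map Prod.snd)) 0) := by
        unfold PySem.List.min? at hml ⊢
        rw [List.foldl_append, hml]
        rfl
      rw [hm]
      have hsnoc := pv_argmin_snoc (l.map Prod.snd) p.2 hC
      have hmap2 : (l ++ [p]).map Prod.snd = l.map Prod.snd ++ [p.2] := by simp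
      have hmap1 : (l ++ [p]).map Prod.fst = l.map Prod.fst ++ [p.1] := by simp
      rw [hmap1, hmap2, hsnoc]
      by_cases hc : p.2 < (l.map Prod.snd).getD (pvArgmin (l.map Prod.snd)) 0
      · simp only [if_pos hc]
        have e1 : (l.map Prod.fst ++ [p.1]).getD (l.map Prod.snd).length 0 = p.1 := by
          rw [List.getD_append_right]
          · simp
          · simp
        have e2 : (l.map Prod.snd ++ [p.2]).getD (l.map Prod.snd).length 0 = p.2 := by
          rw [List.getD_append_right _ _ _ _ (le_refl _)]; simp
        rw [e1, e2]
      · simp only [if_neg hc]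
        have e1 : (l.map Prod.fst ++ [p.1]).getD (pvArgmin (l.map Prod.snd)) 0
            = (l.map Prod.fst).getD (pvArgmin (l.map Prod.snd)) 0 :=
          List.getD_append _ _ _ _ (by simpa using hlt)
        have e2 : (l.map Prod.snd ++ [p.2]).getD (pvArgmin (l.map Prod.snd)) 0
            = (l.map Prod.snd).getD (pvArgmin (l.map Prod.snd)) 0 :=
          List.getD_append _ _ _ _ hlt
        rw [e1, e2]

theorem pv_zip_getD (K C : List Int) (hK : K.Nodup) (hlen : C.length = K.length)
    (m : Nat) (hm : m < K.length) :
    PySem.Dict.getD ⟨K.zip C⟩ (K.getD m 0) 0 = C.getD m 0 := by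
  induction K generalizing C m with
  | nil => simp at hm
  | cons k K ih =>
    cases C with
    | nil => simp at hlen
    | cons c C =>
      cases m with
      | zero => simp [PySem.Dict.getD, PySem.Dict.get?]
      | succ m =>
        have hm' : m < K.length := by simpa using hm
        have hkm : k ≠ K.getD m 0 := by
          rw [List.getD_eq_getElem _ _ hm']
          intro hcon
          exact (List.nodup_cons.mp hK).1 (hcon ▸ List.getElem_mem hm')
        have hlen' : C.length = K.length := by simpa using hlen
        have := ih C (List.nodup_cons.mp hK).2 hlen' m hm'
        simp only [PySem.Dict.getD, PySem.Dict.get?] at this ⊢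
        rw [List.getD_cons_succ, List.getD_cons_succ, List.zip_cons_cons,
          List.find?_cons_of_neg (by simpa using hkm)]
        exact this

theorem pv_zip_map_set (K C : List Int) (hK : K.Nodup) (hlen : C.length = K.length)
    (m : Nat) (hm : m < K.length) (v : Int) :
    (K.zip C).map (fun p => if p.1 == K.getD m 0 then (K.getD m 0, v) else p)
      = K.zip (C.set m v) := by
  induction K generalizing C m with
  | nil => simp
  | cons k K ih =>
    cases C with
    | nil => simp at hlen
    | cons c C =>
      have hlen' : C.length = K.length := by simpa using hlen
      have hknot : k ∉ K := (List.nodup_cons.mp hK).1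
      cases m with
      | zero =>
        simp only [List.getD_cons_zero, List.zip_cons_cons, List.map_cons, List.set]
        rw [if_pos (by simp)]
        congr 1
        rw [List.map_congr_left (g := id), List.map_id]
        intro p hp
        have : p.1 ∈ K := (List.of_mem_zip hp).1
        have : p.1 ≠ k := fun hc => hknot (hc ▸ this)
        simp [this]
      | succ m =>
        have hm' : m < K.length := by simpa using hm
        have hkm : k ≠ K.getD m 0 := by
          rw [List.getD_eq_getElem _ _ hm']
          intro hcon
          exact hknot (hcon ▸ List.getElem_mem hm')
        simp only [List.getD_cons_succ, List.zip_cons_cons, List.map_cons, List.set]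
        rw [if_neg (by simpa using hkm.symm ∘ Eq.symm)]
        exact congrArg _ (ih C (List.nodup_cons.mp hK).2 hlen' m hm')

theorem pv_zip_contains (K C : List Int) (hlen : C.length = K.length)
    (m : Nat) (hm : m < K.length) :
    PySem.Dict.contains ⟨K.zip C⟩ (K.getD m 0) = true := by
  simp only [PySem.Dict.contains, List.any_eq_true]
  refine ⟨(K.getD m 0, C.getD m 0), ?_, by simp⟩
  rw [List.getD_eq_getElem _ _ hm, List.getD_eq_getElem _ _ (by omega)]
  have hmz : m < (K.zip C).length := by simp; omega
  have := List.getElem_mem hmz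
  rwa [List.getElem_zip] at this

theorem pv_zip_insert (K C : List Int) (hK : K.Nodup) (hlen : C.length = K.length)
    (m : Nat) (hm : m < K.length) (v : Int) :
    PySem.Dict.insert ⟨K.zip C⟩ (K.getD m 0) v = ⟨K.zip (C.set m v)⟩ := by
  simp only [PySem.Dict.insert, pv_zip_contains K C hlen m hm, if_pos]
  exact congrArg _ (pv_zip_map_set K C hK hlen m hm v)

theorem pv_getD_inj (K : List Int) (hK : K.Nodup) {i j : Nat}
    (hi : i < K.length) (hj : j < K.length) :
    K.getD i 0 = K.getD j 0 ↔ i = j := by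
  rw [List.getD_eq_getElem _ _ hi, List.getD_eq_getElem _ _ hj, hK.getElem_inj_iff]

theorem pv_contains_added (K : List Int) (adds : List Int) (order : List Nat)
    (hK : K.Nodup) (hob : ∀ i ∈ order, i < K.length) (m : Nat) (hm : m < K.length) :
    PySem.Dict.contains ⟨order.map (fun i => ((K.getD i 0 : Int), adds.getD i 0))⟩ (K.getD m 0)
      = decide (m ∈ order) := by
  induction order with
  | nil => rfl
  | cons j order ih =>
    have hj : j < K.length := hob j (by simp)
    have ih' := ih (fun i hi => hob i (by simp [hi]))
    simp only [PySem.Dict.contains, List.map_cons, List.any_cons] at ih' ⊢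
    rw [ih']
    by_cases h : j = m
    · subst h; simp
    · have hne : K.getD j 0 ≠ K.getD m 0 := fun hc => h ((pv_getD_inj K hK hj hm).mp hc)
      have h1 : (K.getD j 0 == K.getD m 0) = false := by simpa using hne
      have hmj : m ≠ j := fun hc => h hc.symm
      rw [h1]
      simp [List.mem_cons, hmj]

theorem pv_getD_added (K : List Int) (adds : List Int) (order : List Nat)
    (hK : K.Nodup) (hob : ∀ i ∈ order, i < K.length) (m : Nat) (hm : m < K.length)
    (hmem : m ∈ order) :
    PySem.Dict.getD ⟨order.map (fun i => ((K.getD i 0 : Int), adds.getD i 0))⟩ (K.getD m 0) 0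
      = adds.getD m 0 := by
  induction order with
  | nil => simp at hmem
  | cons j order ih =>
    have hj : j < K.length := hob j (by simp)
    by_cases h : j = m
    · subst h
      simp [PySem.Dict.getD, PySem.Dict.get?, List.find?]
    · have hne : K.getD j 0 ≠ K.getD m 0 := fun hc => h ((pv_getD_inj K hK hj hm).mp hc)
      have hmem' : m ∈ order := by
        rcases List.mem_cons.mp hmem with h' | h'
        · exact absurd h'.symm h
        · exact h'
      have := ih (fun i hi => hob i (by simp [hi])) hmem'
      simp only [PySem.Dict.getD, PySem.Dict.get?] at this ⊢
      rw [List.map_cons, List.find?_cons_of_neg (by simpa using hne)]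
      exact this

theorem pv_getD_set_self (l : List Int) (n : Nat) (v : Int) (h : n < l.length) :
    (l.set n v).getD n 0 = v := by
  rw [List.getD_eq_getElem _ _ (by simpa using h), List.getElem_set_self]

theorem pv_insert_added_mem (K adds : List Int) (order : List Nat)
    (hK : K.Nodup) (hob : ∀ i ∈ order, i < K.length) (hlen : adds.length = K.length)
    (m : Nat) (hm : m < K.length) (hmem : m ∈ order) (v : Int) :
    PySem.Dict.insert ⟨order.map (fun i => ((K.getD i 0 : Int), adds.getD i 0))⟩ (K.getD m 0) v
      = ⟨order.map (fun i => ((K.getD i 0 : Int), (adds.set m v).getD i 0))⟩ := by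
  simp only [PySem.Dict.insert, pv_contains_added K adds order hK hob m hm, hmem,
    decide_true, if_pos, PySem.Dict.items]
  congr 1
  rw [List.map_map]
  apply List.map_congr_left
  intro i hi
  have hilt : i < K.length := hob i hi
  by_cases h : i = m
  · subst h
    simp only [Function.comp_apply, beq_self_eq_true, if_pos]
    rw [pv_getD_set_self adds i v (by omega)]
  · have : K.getD i 0 ≠ K.getD m 0 := fun hc => h ((pv_getD_inj K hK hilt hm).mp hc)
    simp only [Function.comp_apply]
    rw [if_neg (by simpa using this), pv_getD_set_ne adds i m v 0 h]

theorem pv_insert_added_notmem (K adds : List Int) (order : List Nat)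
    (hK : K.Nodup) (hob : ∀ i ∈ order, i < K.length) (hlen : adds.length = K.length)
    (m : Nat) (hm : m < K.length) (hmem : m ∉ order) (v : Int) :
    PySem.Dict.insert ⟨order.map (fun i => ((K.getD i 0 : Int), adds.getD i 0))⟩ (K.getD m 0) v
      = ⟨(order ++ [m]).map (fun i => ((K.getD i 0 : Int), (adds.set m v).getD i 0))⟩ := by
  have hc : PySem.Dict.contains ⟨order.map (fun i => ((K.getD i 0 : Int), adds.getD i 0))⟩ (K.getD m 0) = false := by
    rw [pv_contains_added K adds order hK hob m hm]
    simpa using hmem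
  simp only [PySem.Dict.insert, hc, Bool.false_eq_true, if_false]
  congr 1
  rw [List.map_append, List.map_cons, List.map_nil]
  congr 1
  · apply List.map_congr_left
    intro i hi
    have : i ≠ m := fun hc => hmem (hc ▸ hi)
    rw [pv_getD_set_ne adds i m v 0 this]
  · rw [pv_getD_set_self adds m v (by omega)]

theorem pv_head_sorted {α κ : Type} [LinearOrder κ] (xs : List α) (key : α → κ) :
    (PySem.List.sorted xs key false).head? = PySem.List.min? xs key := by
  induction xs using List.reverseRecOn with
  | nil => rfl
  | append_singleton xs x ih =>
    have hs : PySem.List.sorted (xs ++ [x]) key false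
        = PySem.List.insertBy (fun a b => decide (key a < key b)) x (PySem.List.sorted xs key false) := by
      simp [PySem.List.sorted, List.foldl_append]
    have hm : PySem.List.min? (xs ++ [x]) key
        = (match PySem.List.min? xs key with
           | none => some x
           | some m => if key x < key m then some x else some m) := by
      unfold PySem.List.min?
      rw [List.foldl_append]
      rfl
    rw [hs, hm]
    cases h : PySem.List.sorted xs key false with
    | nil =>
      have : PySem.List.min? xs key = none := by
        rw [PySem.List.min?_eq_none_iff]
        exact (PySem.List.sorted_eq_nil_iff xs key false).mp h
      rw [this]
      simp [PySem.List.insertBy]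
    | cons y ys =>
      have hy : PySem.List.min? xs key = some y := by rw [← ih, h]; rfl
      rw [hy]
      simp only [PySem.List.insertBy]
      by_cases hxy : key x < key y
      · simp [hxy]
      · simp [hxy]

theorem pv_loop_eq (K : List Int) (hK : K.Nodup) (hKne : K ≠ []) :
    ∀ (fuel : Nat) (C adds : List Int) (order : List Nat) (t : Int),
      C.length = K.length → adds.length = K.length →
      (∀ i ∈ order, i < K.length) → order.Nodup →
      (∀ i, i ∈ order ↔ adds.getD i 0 ≠ 0) →
      (∀ i, 0 ≤ adds.getD i 0) →
      (fuel ≠ 0 → (fuel : Int) ≤ t) →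
      ((pvA_loop fuel ⟨order.map (fun i => ((K.getD i 0 : Int), adds.getD i 0))⟩ ⟨K.zip C⟩ t).1.items,
       (pvA_loop fuel ⟨order.map (fun i => ((K.getD i 0 : Int), adds.getD i 0))⟩ ⟨K.zip C⟩ t).2.items)
        = pvG_loop fuel K C adds order := by
  intro fuel
  induction fuel with
  | zero => intro C adds order t hC ha hob hono hmem hpos ht; rfl
  | succ n ih =>
    intro C adds order t hC ha hob hono hmem hpos ht
    have hK0 : 0 < K.length := List.length_pos_iff.mpr hKne
    have hCne : C ≠ [] := by
      intro h
      rw [h] at hC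
      simp at hC
      omega
    have hzne : K.zip C ≠ [] := by
      apply List.ne_nil_of_length_pos
      rw [List.length_zip]
      omega
    have hmlt : pvArgmin C < K.length := hC ▸ pv_argmin_lt C hCne
    have hmaddslt : pvArgmin C < adds.length := by omega
    have hhead : (PySem.List.sorted (K.zip C) (fun x => x.2)).head?
        = some (K.getD (pvArgmin C) 0, C.getD (pvArgmin C) 0) := by
      rw [pv_head_sorted, pv_min?_argmin _ hzne,
        List.map_fst_zip (by omega), List.map_snd_zip (by omega)]
    have ht1 : ¬ t ≤ 0 := by
      have := ht (by omega)
      push_cast at this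
      omega
    have hstep : pvA_loop (n + 1) ⟨order.map (fun i => ((K.getD i 0 : Int), adds.getD i 0))⟩ ⟨K.zip C⟩ t
        = pvA_loop n
            (if PySem.Dict.contains ⟨order.map (fun i => ((K.getD i 0 : Int), adds.getD i 0))⟩ (K.getD (pvArgmin C) 0)
             then PySem.Dict.insert ⟨order.map (fun i => ((K.getD i 0 : Int), adds.getD i 0))⟩ (K.getD (pvArgmin C) 0)
                    (PySem.Dict.getD ⟨order.map (fun i => ((K.getD i 0 : Int), adds.getD i 0))⟩ (K.getD (pvArgmin C) 0) 0 + 1)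
             else PySem.Dict.insert ⟨order.map (fun i => ((K.getD i 0 : Int), adds.getD i 0))⟩ (K.getD (pvArgmin C) 0) 1)
            (PySem.Dict.insert ⟨K.zip C⟩ (K.getD (pvArgmin C) 0)
              (PySem.Dict.getD ⟨K.zip C⟩ (K.getD (pvArgmin C) 0) 0 + 1)) (t - 1) := by
      conv_lhs => rw [pvA_loop]
      rw [show PySem.Dict.items ⟨K.zip C⟩ = K.zip C from rfl, hhead]
      simp only [if_neg ht1]
    rw [hstep]
    rw [pv_contains_added K adds order hK hob _ hmlt,
      pv_zip_getD K C hK hC _ hmlt, pv_zip_insert K C hK hC _ hmlt]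
    conv_rhs => rw [pvG_loop]
    by_cases hm0 : adds.getD (pvArgmin C) 0 = 0
    · have hnotmem : pvArgmin C ∉ order := fun hmm => (hmem _).mp hmm hm0
      rw [if_neg (by simpa using hnotmem)]
      rw [pv_insert_added_notmem K adds order hK hob ha _ hmlt hnotmem 1]
      have hone : adds.set (pvArgmin C) (adds.getD (pvArgmin C) 0 + 1)
          = adds.set (pvArgmin C) 1 := by rw [hm0]; norm_num
      rw [show (adds.getD (pvArgmin C) 0 == 0) = true by simpa using hm0, if_pos rfl, hone]
      apply ih
      · simpa using hC
      · simpa using ha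
      · intro i hi
        rcases List.mem_append.mp hi with h' | h'
        · exact hob i h'
        · simp at h'
          omega
      · exact List.Nodup.append hono (List.nodup_singleton _)
          (List.disjoint_singleton.mpr hnotmem)
      · intro i
        by_cases hieq : i = pvArgmin C
        · subst hieq
          rw [pv_getD_set_self adds _ 1 hmaddslt]
          simp
        · rw [pv_getD_set_ne adds i _ 1 0 hieq]
          rw [List.mem_append]
          simp only [List.mem_singleton, hieq, or_false]
          exact hmem i
      · intro i
        by_cases hieq : i = pvArgmin C
        · subst hieq
          rw [pv_getD_set_self adds _ 1 hmaddslt]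
          omega
        · rw [pv_getD_set_ne adds i _ 1 0 hieq]
          exact hpos i
      · intro _
        have := ht (by omega)
        push_cast at this ⊢
        omega
    · have hmm : pvArgmin C ∈ order := (hmem _).mpr hm0
      rw [if_pos (by simpa using hmm)]
      rw [pv_getD_added K adds order hK hob _ hmlt hmm]
      rw [pv_insert_added_mem K adds order hK hob ha _ hmlt hmm _]
      rw [show (adds.getD (pvArgmin C) 0 == 0) = false by simpa using hm0]
      simp only [Bool.false_eq_true, if_false]
      apply ih
      · simpa using hC
      · simpa using ha
      · exact hob
      · exact hono
      · intro i
        by_cases hieq : i = pvArgmin C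
        · subst hieq
          rw [pv_getD_set_self adds _ _ hmaddslt]
          have := hpos (pvArgmin C)
          constructor
          · intro _; omega
          · intro _; exact hmm
        · rw [pv_getD_set_ne adds i _ _ 0 hieq]
          exact hmem i
      · intro i
        by_cases hieq : i = pvArgmin C
        · subst hieq
          rw [pv_getD_set_self adds _ _ hmaddslt]
          have := hpos (pvArgmin C)
          omega
        · rw [pv_getD_set_ne adds i _ _ 0 hieq]
          exact hpos i
      · intro _
        have := ht (by omega)
        push_cast at this ⊢
        omega

theorem pv_contains_iff (l : List (Int × Int)) (c : Int) :
    (PySem.Dict.contains (⟨l⟩ : PySem.Dict Int Int) c = true) ↔ c ∈ l.map Prod.fst := by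
  simp [PySem.Dict.contains, List.any_eq_true, List.mem_map]


-- the single greedy step of A's loop in array form, and the final packaging
def pvStepF (st : List Int × List Int × List Nat) : List Int × List Int × List Nat :=
  let m := pvArgmin st.1
  (st.1.set m (st.1.getD m 0 + 1), st.2.1.set m (st.2.1.getD m 0 + 1),
   if st.2.1.getD m 0 == 0 then st.2.2 ++ [m] else st.2.2)

def pvG_fin (K : List Int) (st : List Int × List Int × List Nat) :
    (List (Int × Int)) × (List (Int × Int)) :=
  (st.2.2.map (fun i => (K.getD i 0, st.2.1.getD i 0)), K.zip st.1)

theorem pvG_loop_iter (fuel : Nat) (K : List Int) : ∀ C adds order,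
    pvG_loop fuel K C adds order = pvG_fin K (pvStepF^[fuel] (C, adds, order)) := by
  induction fuel with
  | zero => intro C adds order; rfl
  | succ m ih =>
    intro C adds order
    rw [pvG_loop, ih, Function.iterate_succ_apply]
    rfl

theorem pv_argmin_singleton (x : Int) : pvArgmin [x] = 0 := by
  unfold pvArgmin
  norm_num [PySem.List.pyRange]

theorem pv_argmin_spec (C : List Int) (h : C ≠ []) :
    (∀ j < C.length, C.getD (pvArgmin C) 0 ≤ C.getD j 0) ∧
    (∀ j < pvArgmin C, C.getD (pvArgmin C) 0 < C.getD j 0) := by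
  induction C using List.reverseRecOn with
  | nil => exact absurd rfl h
  | append_singleton C x ih =>
    rcases eq_or_ne C [] with rfl | hC
    · rw [show ([] : List Int) ++ [x] = [x] from rfl, pv_argmin_singleton]
      constructor
      · intro j hj
        have : j = 0 := by simpa using hj
        subst this
        simp
      · intro j hj; omega
    · obtain ⟨hle, hlt⟩ := ih hC
      have hlen : 0 < C.length := List.length_pos_iff.mpr hC
      have hmlt := pv_argmin_lt C hC
      rw [pv_argmin_snoc C x hC]
      by_cases hc : x < C.getD (pvArgmin C) 0
      · rw [if_pos hc]
        have hv : (C ++ [x]).getD C.length 0 = x := by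
          rw [List.getD_append_right _ _ _ _ (le_refl _)]; simp
        constructor
        · intro j hj
          rw [hv]
          rcases lt_or_ge j C.length with hj' | hj'
          · rw [List.getD_append _ _ _ _ hj']
            have := hle j hj'
            omega
          · have : j = C.length := by simp at hj; omega
            rw [this, hv]
        · intro j hj
          rw [hv, List.getD_append _ _ _ _ hj]
          have := hle j hj
          omega
      · rw [if_neg hc]
        have hv : (C ++ [x]).getD (pvArgmin C) 0 = C.getD (pvArgmin C) 0 :=
          List.getD_append _ _ _ _ hmlt
        constructor
        · intro j hj
          rw [hv]
          rcases lt_or_ge j C.length with hj' | hj'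
          · rw [List.getD_append _ _ _ _ hj']
            exact hle j hj'
          · have hjl : j = C.length := by simp at hj; omega
            have hx : (C ++ [x]).getD C.length 0 = x := by
              rw [List.getD_append_right _ _ _ _ (le_refl _)]; simp
            rw [hjl, hx]
            omega
        · intro j hj
          rw [hv, List.getD_append _ _ _ _ (by omega)]
          exact hlt j hj

theorem pv_argmin_unique (C : List Int) (m : Nat) (hm : m < C.length)
    (hle : ∀ j < C.length, C.getD m 0 ≤ C.getD j 0)
    (hlt : ∀ j < m, C.getD m 0 < C.getD j 0) : pvArgmin C = m := by
  have hne : C ≠ [] := by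
    intro h
    rw [h] at hm
    simp at hm
  obtain ⟨hle', hlt'⟩ := pv_argmin_spec C hne
  have ha := pv_argmin_lt C hne
  rcases Nat.lt_trichotomy (pvArgmin C) m with h | h | h
  · have h1 := hlt _ h
    have h2 := hle' m hm
    omega
  · exact h
  · have h1 := hlt' _ h
    have h2 := hle _ ha
    omega

-- canonical mid-round states: classes of `pref` are at water level L, those of `bumped`
-- (⊆ pref) already at L+1, every other class still at its original count cg i
def pvC (n : Nat) (cg : Nat → Int) (pref bumped : List Nat) (L : Int) : List Int :=
  (List.range n).map (fun i => if i ∈ bumped then L + 1 else if i ∈ pref then L else cg i)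

def pvA (n : Nat) (cg : Nat → Int) (pref bumped : List Nat) (L : Int) : List Int :=
  (List.range n).map (fun i => if i ∈ bumped then L - cg i + 1 else if i ∈ pref then L - cg i else 0)

def pvO (cg : Nat → Int) (pref bumped : List Nat) (L : Int) : List Nat :=
  pref.filter (fun i => decide (cg i < L)) ++ bumped.filter (fun i => decide (cg i = L))

theorem pv_getD_mapRange (n : Nat) (f : Nat → Int) (i : Nat) :
    ((List.range n).map f).getD i 0 = if i < n then f i else 0 := by
  by_cases hi : i < n
  · rw [if_pos hi, List.getD_eq_getElem _ _ (by simpa using hi)]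
    simp
  · rw [if_neg hi, List.getD_eq_default _ _ (by simpa using hi)]

theorem pv_set_mapRange (n : Nat) (f : Nat → Int) (m : Nat) (hm : m < n) (v : Int) :
    ((List.range n).map f).set m v = (List.range n).map (fun i => if i = m then v else f i) := by
  apply List.ext_getElem
  · simp
  · intro i h1 h2
    simp only [List.getElem_set, List.getElem_map, List.getElem_range]
    split_ifs with h h' h'
    · simp at h1
      omega
    · omega
    · omega
    · rfl

theorem pv_mapRange_congr (n : Nat) (f g : Nat → Int) (h : ∀ i < n, f i = g i) :
    (List.range n).map f = (List.range n).map g :=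
  List.map_congr_left (fun i hi => h i (List.mem_range.mp hi))

theorem pv_asc_eq {α : Type} [LinearOrder α] (l1 l2 : List α) (h1 : l1.Pairwise (· < ·)) (h2 : l2.Pairwise (· < ·))
    (hp : l2.Perm l1) : l1 = l2 := by
  have e1 : PySem.List.sorted l1 (fun x => x) false = l1 :=
    PySem.List.sorted_eq_of_perm_of_pairwise_lt (xs := l1) (ys := l1) (fun x => x) (List.Perm.refl l1) h1
  have e2 : PySem.List.sorted l1 (fun x => x) false = l2 :=
    PySem.List.sorted_eq_of_perm_of_pairwise_lt (xs := l1) (ys := l2) (fun x => x) hp h2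
  rw [← e1, e2]

theorem pv_lex_split (cg : Nat → Int) (L : Int) (p : Nat → Bool) (l : List Nat)
    (hlex : l.Pairwise (fun a b => cg a < cg b ∨ (cg a = cg b ∧ a < b))) :
    l.filter (fun i => decide (cg i < L) || (decide (cg i = L) && p i))
      = l.filter (fun i => decide (cg i < L)) ++ l.filter (fun i => decide (cg i = L) && p i) := by
  induction l with
  | nil => simp
  | cons x l ih =>
    have hx := (List.pairwise_cons.mp hlex).1
    have ih' := ih (List.pairwise_cons.mp hlex).2
    have hge : ∀ b ∈ l, cg x ≤ cg b := by
      intro b hb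
      rcases hx b hb with h | h
      · omega
      · omega
    by_cases h1 : cg x < L
    · have hne : decide (cg x = L) = false := by simp; omega
      simp only [List.filter_cons, h1, hne, decide_true, Bool.true_or, Bool.false_and,
        Bool.false_eq_true, if_pos, if_neg, not_false_iff, List.cons_append]
      rw [ih']
    · by_cases h2 : cg x = L
      · have hnil : l.filter (fun i => decide (cg i < L)) = [] := by
          rw [List.filter_eq_nil_iff]
          intro b hb
          have := hge b hb
          simp
          omega
        by_cases h3 : p x = true
        · simp only [List.filter_cons, h1, h2, h3, decide_false, decide_true, Bool.false_or,
            Bool.true_and, if_pos]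
          rw [ih', hnil]
          simp
        · have h3' : p x = false := by simpa using h3
          simp only [List.filter_cons, h1, h2, h3', decide_false, decide_true, Bool.false_or,
            Bool.true_and, Bool.and_false, if_neg, Bool.false_eq_true, not_false_iff]
          rw [ih', hnil]
          simp
      · have h1' : decide (cg x < L) = false := by simpa using h1
        have h2' : decide (cg x = L) = false := by simpa using h2
        simp only [List.filter_cons, h1', h2', Bool.false_or, Bool.false_and,
          Bool.false_eq_true, if_neg, not_false_iff]
        exact ih'

theorem pv_filter_eqL_pairwise (cg : Nat → Int) (L : Int) (p : Nat → Bool) (l : List Nat)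
    (hlex : l.Pairwise (fun a b => cg a < cg b ∨ (cg a = cg b ∧ a < b))) :
    (l.filter (fun i => decide (cg i = L) && p i)).Pairwise (· < ·) := by
  refine List.Pairwise.imp_of_mem ?_ (hlex.filter _)
  intro a b ha hb hr
  have ha' := List.of_mem_filter ha
  have hb' := List.of_mem_filter hb
  simp at ha' hb'
  rcases hr with h | h
  · omega
  · exact h.2

theorem pv_sortedQ_pairwise {α : Type} [LinearOrder α] (l : List α) (hnd : l.Nodup) :
    (PySem.List.sorted l (fun x => x) false).Pairwise (· < ·) := by
  have h1 : (PySem.List.sorted l (fun x => x) false).Pairwise (fun a b => a ≤ b) :=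
    PySem.List.sorted_pairwise l (fun x => x)
  have h2 : (PySem.List.sorted l (fun x => x) false).Nodup :=
    (PySem.List.sorted_perm l (fun x => x) false).nodup_iff.mpr hnd
  refine List.Pairwise.imp ?_ (h1.and h2)
  intro a b h
  exact lt_of_le_of_ne h.1 h.2

theorem pv_partial (n : Nat) (cg : Nat → Int) (τ : List Nat) (k : Nat) (L : Int)
    (hτp : τ.Perm (List.range n))
    (hlex : τ.Pairwise (fun a b => cg a < cg b ∨ (cg a = cg b ∧ a < b)))
    (hkn : k ≤ n)
    (hL : ∀ i ∈ τ.take k, cg i ≤ L)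
    (hstr : ∀ i ∈ τ.drop k, L + 1 ≤ cg i) :
    ∀ r, r ≤ k →
      pvStepF^[r] (pvC n cg (τ.take k) [] L, pvA n cg (τ.take k) [] L, pvO cg (τ.take k) [] L)
        = (pvC n cg (τ.take k) ((PySem.List.sorted (τ.take k) (fun x => x) false).take r) L,
           pvA n cg (τ.take k) ((PySem.List.sorted (τ.take k) (fun x => x) false).take r) L,
           pvO cg (τ.take k) ((PySem.List.sorted (τ.take k) (fun x => x) false).take r) L) := by
  have hτnd : τ.Nodup := hτp.nodup_iff.mpr List.nodup_range
  have hτlen : τ.length = n := by simpa using hτp.length_eq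
  have hmemτ : ∀ i, i ∈ τ ↔ i < n := by
    intro i
    rw [hτp.mem_iff]
    simp
  have hprefnd : (τ.take k).Nodup := hτnd.sublist (List.take_sublist _ _)
  set Q := PySem.List.sorted (τ.take k) (fun x => x) false with hQdef
  have hQperm : Q.Perm (τ.take k) := PySem.List.sorted_perm _ _ _
  have hQpw : Q.Pairwise (· < ·) := pv_sortedQ_pairwise _ hprefnd
  have hQlen : Q.length = k := by
    rw [hQperm.length_eq, List.length_take]
    omega
  have hmemQ : ∀ i, i ∈ Q ↔ i ∈ τ.take k := fun i => hQperm.mem_iff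
  have hprefn : ∀ i ∈ τ.take k, i < n := fun i hi => (hmemτ i).mp (List.mem_of_mem_take hi)
  have hpg : ∀ (i j : Nat) (hi : i < Q.length) (hj : j < Q.length), i < j → Q[i] < Q[j] :=
    List.pairwise_iff_getElem.mp hQpw
  have hout : ∀ j, j < n → j ∉ τ.take k → L + 1 ≤ cg j := by
    intro j hj hnot
    apply hstr
    have : j ∈ τ := (hmemτ j).mpr hj
    rw [← List.take_append_drop k τ, List.mem_append] at this
    tauto
  intro r
  induction r with
  | zero =>
    intro _
    rfl
  | succ r ih =>
    intro hrk
    have hrk' : r < k := by omega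
    have hrQ : r < Q.length := by omega
    rw [Function.iterate_succ_apply', ih (by omega)]
    set m := Q[r] with hm
    have hmQ : m ∈ Q := List.getElem_mem hrQ
    have hmpref : m ∈ τ.take k := (hmemQ m).mp hmQ
    have hmn : m < n := hprefn m hmpref
    have htake : Q.take (r + 1) = Q.take r ++ [m] := by
      rw [hm, List.take_add_one, List.getElem?_eq_getElem hrQ]
      rfl
    have hmnot : m ∉ Q.take r := by
      intro hc
      obtain ⟨j, hj, hjq⟩ := List.getElem_of_mem hc
      have hjr : j < r := by
        have := hj
        simp [List.length_take] at this
        omega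
      have hq : (Q.take r)[j]'hj = Q[j]'(by omega) := List.getElem_take
      have hlt := hpg j r (by omega) hrQ hjr
      rw [← hq, hjq, ← hm] at hlt
      omega
    have hCval : ∀ j, (pvC n cg (τ.take k) (Q.take r) L).getD j 0
        = if j < n then (if j ∈ Q.take r then L + 1 else if j ∈ τ.take k then L else cg j) else 0 := by
      intro j
      simp only [pvC]
      rw [pv_getD_mapRange]
    have hAval : ∀ j, (pvA n cg (τ.take k) (Q.take r) L).getD j 0
        = if j < n then (if j ∈ Q.take r then L - cg j + 1 else if j ∈ τ.take k then L - cg j else 0) else 0 := by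
      intro j
      simp only [pvA]
      rw [pv_getD_mapRange]
    have hCm : (pvC n cg (τ.take k) (Q.take r) L).getD m 0 = L := by
      rw [hCval]
      simp [hmn, hmnot, hmpref]
    have hAm : (pvA n cg (τ.take k) (Q.take r) L).getD m 0 = L - cg m := by
      rw [hAval]
      simp [hmn, hmnot, hmpref]
    have hlenC : (pvC n cg (τ.take k) (Q.take r) L).length = n := by simp [pvC]
    have hargmin : pvArgmin (pvC n cg (τ.take k) (Q.take r) L) = m := by
      apply pv_argmin_unique _ _ (by omega)
      · intro j hj
        rw [hlenC] at hj
        rw [hCm, hCval j, if_pos hj]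
        by_cases h1 : j ∈ Q.take r
        · rw [if_pos h1]; omega
        · rw [if_neg h1]
          by_cases h2 : j ∈ τ.take k
          · rw [if_pos h2]
          · rw [if_neg h2]
            have := hout j hj h2
            omega
      · intro j hj
        rw [hCm, hCval j, if_pos (by omega)]
        by_cases h1 : j ∈ Q.take r
        · rw [if_pos h1]; omega
        · rw [if_neg h1]
          by_cases h2 : j ∈ τ.take k
          · exfalso
            have hjQ : j ∈ Q := (hmemQ j).mpr h2
            obtain ⟨idx, hidx, hidxq⟩ := List.getElem_of_mem hjQ
            rcases Nat.lt_trichotomy idx r with hir | hir | hir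
            · apply h1
              have hq : (Q.take r)[idx]'(by simp [List.length_take]; omega) = Q[idx]'hidx :=
                List.getElem_take
              rw [← hidxq, ← hq]
              exact List.getElem_mem _
            · subst hir
              rw [← hm] at hidxq
              omega
            · have hlt := hpg r idx hrQ hidx hir
              rw [← hm, hidxq] at hlt
              omega
          · rw [if_neg h2]
            have := hout j (by omega) h2
            omega
    simp only [pvStepF, hargmin, hCm, hAm]
    refine Prod.ext ?_ (Prod.ext ?_ ?_)
    · show (pvC n cg (τ.take k) (Q.take r) L).set m (L + 1) = pvC n cg (τ.take k) (Q.take (r+1)) L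
      simp only [pvC]
      rw [pv_set_mapRange n _ m hmn (L + 1)]
      apply pv_mapRange_congr
      intro i hi
      by_cases h1 : i = m
      · have hin : m ∈ Q.take (r + 1) := by
          rw [htake]
          simp
        rw [h1, if_pos rfl, if_pos hin]
      · have hiff : (i ∈ Q.take (r + 1)) ↔ (i ∈ Q.take r) := by
          rw [htake, List.mem_append]
          simp [h1]
        simp only [if_neg h1, hiff]
    · show (pvA n cg (τ.take k) (Q.take r) L).set m (L - cg m + 1) = pvA n cg (τ.take k) (Q.take (r+1)) L
      simp only [pvA]
      rw [pv_set_mapRange n _ m hmn (L - cg m + 1)]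
      apply pv_mapRange_congr
      intro i hi
      by_cases h1 : i = m
      · have hin : m ∈ Q.take (r + 1) := by
          rw [htake]
          simp
        rw [h1, if_pos rfl, if_pos hin]
      · have hiff : (i ∈ Q.take (r + 1)) ↔ (i ∈ Q.take r) := by
          rw [htake, List.mem_append]
          simp [h1]
        simp only [if_neg h1, hiff]
    · show (if (L - cg m == 0) = true then pvO cg (τ.take k) (Q.take r) L ++ [m]
            else pvO cg (τ.take k) (Q.take r) L) = pvO cg (τ.take k) (Q.take (r+1)) L
      simp only [pvO, htake, List.filter_append]
      by_cases h1 : cg m = L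
      · rw [if_pos (by simp; omega)]
        have : List.filter (fun i => decide (cg i = L)) [m] = [m] := by simp [h1]
        rw [this, List.append_assoc]
      · rw [if_neg (by simp; omega)]
        have : List.filter (fun i => decide (cg i = L)) [m] = [] := by simp [h1]
        rw [this, List.append_nil]

def pvCanon (n : Nat) (cg : Nat → Int) (τ : List Nat) (k : Nat) (L : Int) :
    List Int × List Int × List Nat :=
  (pvC n cg (τ.take k) [] L, pvA n cg (τ.take k) [] L, pvO cg (τ.take k) [] L)

theorem pv_round (n : Nat) (cg : Nat → Int) (τ : List Nat) (k : Nat) (L : Int)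
    (hτp : τ.Perm (List.range n))
    (hlex : τ.Pairwise (fun a b => cg a < cg b ∨ (cg a = cg b ∧ a < b)))
    (hkn : k ≤ n)
    (hL : ∀ i ∈ τ.take k, cg i ≤ L)
    (hstr : ∀ i ∈ τ.drop k, L + 1 ≤ cg i) :
    pvStepF^[k] (pvCanon n cg τ k L) = pvCanon n cg τ k (L + 1) := by
  have hτnd : τ.Nodup := hτp.nodup_iff.mpr List.nodup_range
  have hprefnd : (τ.take k).Nodup := hτnd.sublist (List.take_sublist _ _)
  have hpreflex : (τ.take k).Pairwise (fun a b => cg a < cg b ∨ (cg a = cg b ∧ a < b)) :=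
    hlex.sublist (List.take_sublist _ _)
  set Q := PySem.List.sorted (τ.take k) (fun x => x) false with hQdef
  have hQperm : Q.Perm (τ.take k) := PySem.List.sorted_perm _ _ _
  have hQpw : Q.Pairwise (· < ·) := pv_sortedQ_pairwise _ hprefnd
  have hτlen : τ.length = n := by simpa using hτp.length_eq
  have hQlen : Q.length = k := by
    rw [hQperm.length_eq, List.length_take, hτlen]
    omega
  have hmemQ : ∀ i, i ∈ Q ↔ i ∈ τ.take k := fun i => hQperm.mem_iff
  have h := pv_partial n cg τ k L hτp hlex hkn hL hstr k (le_refl k)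
  rw [show Q.take k = Q from by rw [← hQlen, List.take_length]] at h
  unfold pvCanon
  rw [h]
  refine Prod.ext ?_ (Prod.ext ?_ ?_)
  · show pvC n cg (τ.take k) Q L = pvC n cg (τ.take k) [] (L + 1)
    apply pv_mapRange_congr
    intro i hi
    by_cases h1 : i ∈ τ.take k
    · rw [if_pos ((hmemQ i).mpr h1), if_neg (List.not_mem_nil), if_pos h1]
    · rw [if_neg (fun hc => h1 ((hmemQ i).mp hc)), if_neg h1,
        if_neg (List.not_mem_nil), if_neg h1]
  · show pvA n cg (τ.take k) Q L = pvA n cg (τ.take k) [] (L + 1)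
    apply pv_mapRange_congr
    intro i hi
    by_cases h1 : i ∈ τ.take k
    · rw [if_pos ((hmemQ i).mpr h1), if_neg (List.not_mem_nil), if_pos h1]
      ring
    · rw [if_neg (fun hc => h1 ((hmemQ i).mp hc)), if_neg h1,
        if_neg (List.not_mem_nil), if_neg h1]
  · show pvO cg (τ.take k) Q L = pvO cg (τ.take k) [] (L + 1)
    unfold pvO
    rw [List.filter_nil, List.append_nil]
    have hsplit := pv_lex_split cg L (fun _ => true) (τ.take k) hpreflex
    have hcongr : (τ.take k).filter (fun i => decide (cg i < L + 1))
        = (τ.take k).filter (fun i => decide (cg i < L) || (decide (cg i = L) && (fun (_ : Nat) => true) i)) := by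
      apply List.filter_congr
      intro i _
      rcases lt_trichotomy (cg i) L with h | h | h
      · have h' : cg i < L + 1 := by omega
        simp [h, h']
      · have h' : cg i < L + 1 := by omega
        simp [h, h']
      · have h1 : ¬ cg i < L + 1 := by omega
        have h2 : ¬ cg i < L := by omega
        have h3 : cg i ≠ L := by omega
        simp [h1, h2, h3]
    rw [hcongr, hsplit]
    congr 1
    have e1 : (τ.take k).filter (fun i => decide (cg i = L) && (fun (_ : Nat) => true) i)
        = (τ.take k).filter (fun i => decide (cg i = L)) := by
      apply List.filter_congr
      intro i _
      simp
    rw [e1]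
    have hp1 : ((τ.take k).filter (fun i => decide (cg i = L))).Pairwise (· < ·) := by
      have h2 := pv_filter_eqL_pairwise cg L (fun _ => true) (τ.take k) hpreflex
      rwa [e1] at h2
    exact pv_asc_eq _ _ (hQpw.filter _) hp1 ((hQperm.filter _).symm)

theorem pv_rounds (n : Nat) (cg : Nat → Int) (τ : List Nat) (k : Nat)
    (hτp : τ.Perm (List.range n))
    (hlex : τ.Pairwise (fun a b => cg a < cg b ∨ (cg a = cg b ∧ a < b)))
    (hkn : k ≤ n) :
    ∀ (d : Nat) (L : Int), (∀ i ∈ τ.take k, cg i ≤ L) →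
      (∀ i ∈ τ.drop k, L + d ≤ cg i) →
      pvStepF^[d * k] (pvCanon n cg τ k L) = pvCanon n cg τ k (L + d) := by
  intro d
  induction d with
  | zero =>
    intro L hL hdrop
    simp
  | succ d ih =>
    intro L hL hdrop
    have h1 : pvStepF^[k] (pvCanon n cg τ k L) = pvCanon n cg τ k (L + 1) :=
      pv_round n cg τ k L hτp hlex hkn hL
        (fun i hi => by
          have := hdrop i hi
          have : (0 : Int) ≤ d := by positivity
          omega)
    have h2 := ih (L + 1) (fun i hi => by have := hL i hi; omega)
      (fun i hi => by
        have := hdrop i hi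
        push_cast at this ⊢
        omega)
    have hsplit : (d + 1) * k = d * k + k := by ring
    rw [hsplit, Function.iterate_add_apply, h1, h2]
    congr 1
    push_cast
    ring

theorem pv_absorb (n : Nat) (cg : Nat → Int) (τ : List Nat) (k : Nat) (L : Int)
    (hτp : τ.Perm (List.range n)) (hkd : k < τ.length)
    (hcg : cg (τ[k]'hkd) = L) :
    pvCanon n cg τ k L = pvCanon n cg τ (k + 1) L := by
  have hτnd : τ.Nodup := hτp.nodup_iff.mpr List.nodup_range
  have htake : τ.take (k + 1) = τ.take k ++ [τ[k]'hkd] := by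
    rw [List.take_add_one, List.getElem?_eq_getElem hkd]
    rfl
  have hknot : (τ[k]'hkd) ∉ τ.take k := by
    intro hc
    obtain ⟨j, hj, hjq⟩ := List.getElem_of_mem hc
    have hjk : j < k := by
      have := hj
      simp [List.length_take] at this
      omega
    have hq : (τ.take k)[j]'hj = τ[j]'(by omega) := List.getElem_take
    rw [hq] at hjq
    have : j = k := (List.Nodup.getElem_inj_iff hτnd).mp hjq
    omega
  have hmem : ∀ i, i ∈ τ.take (k + 1) ↔ (i ∈ τ.take k ∨ i = τ[k]'hkd) := by
    intro i
    rw [htake, List.mem_append]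
    simp
  unfold pvCanon
  refine Prod.ext ?_ (Prod.ext ?_ ?_)
  · apply pv_mapRange_congr
    intro i hi
    by_cases h1 : i ∈ τ.take k
    · have e2 : i ∈ τ.take (k + 1) := (hmem i).mpr (Or.inl h1)
      simp [h1, e2]
    · by_cases h2 : i = τ[k]'hkd
      · have e2 : i ∈ τ.take (k + 1) := (hmem i).mpr (Or.inr h2)
        simp [h1, e2, h2, hcg]
      · have e2 : i ∉ τ.take (k + 1) := fun hc => by
          rcases (hmem i).mp hc with h | h
          · exact h1 h
          · exact h2 h
        simp [h1, e2]
  · apply pv_mapRange_congr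
    intro i hi
    by_cases h1 : i ∈ τ.take k
    · have e2 : i ∈ τ.take (k + 1) := (hmem i).mpr (Or.inl h1)
      simp [h1, e2]
    · by_cases h2 : i = τ[k]'hkd
      · have e2 : i ∈ τ.take (k + 1) := (hmem i).mpr (Or.inr h2)
        simp [h1, e2, h2, hcg]
      · have e2 : i ∉ τ.take (k + 1) := fun hc => by
          rcases (hmem i).mp hc with h | h
          · exact h1 h
          · exact h2 h
        simp [h1, e2]
  · show pvO cg (τ.take k) [] L = pvO cg (τ.take (k + 1)) [] L
    unfold pvO
    rw [htake, List.filter_append]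
    have : List.filter (fun i => decide (cg i < L)) [τ[k]'hkd] = [] := by
      simp [hcg]
    rw [this, List.append_nil]

-- stability of Python's sort: sorting range(n) by key gives a (key, value)-lexicographically
-- increasing list
theorem pv_insertBy_lex (key : Int → Int) (x : Int) : ∀ (acc : List Int),
    acc.Pairwise (fun a b => key a < key b ∨ (key a = key b ∧ a < b)) →
    (∀ y ∈ acc, y < x) →
    (PySem.List.insertBy (fun a b => decide (key a < key b)) x acc).Pairwise
      (fun a b => key a < key b ∨ (key a = key b ∧ a < b)) := by
  intro acc
  induction acc with
  | nil => intro _ _; simp [PySem.List.insertBy]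
  | cons y ys ih =>
    intro hacc hlt
    have hy := (List.pairwise_cons.mp hacc).1
    have hys := (List.pairwise_cons.mp hacc).2
    simp only [PySem.List.insertBy]
    by_cases hxy : key x < key y
    · rw [if_pos (by simpa using hxy)]
      refine List.pairwise_cons.mpr ⟨?_, hacc⟩
      intro z hz
      rcases List.mem_cons.mp hz with h | h
      · left
        rw [h]
        exact hxy
      · have hyz := hy z h
        left
        rcases hyz with h' | h'
        · omega
        · omega
    · rw [if_neg (by simpa using hxy)]
      refine List.pairwise_cons.mpr ⟨?_, ih hys (fun z hz => hlt z (by simp [hz]))⟩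
      intro z hz
      rcases (PySem.List.mem_insertBy _ _ _ _).mp hz with h | h
      · rw [h]
        rcases lt_or_eq_of_le (le_of_not_gt hxy) with h' | h'
        · left; exact h'
        · right
          exact ⟨h', hlt y (by simp)⟩
      · exact hy z h
  
theorem pv_sorted_lex (key : Int → Int) : ∀ (l acc : List Int),
    acc.Pairwise (fun a b => key a < key b ∨ (key a = key b ∧ a < b)) →
    (∀ y ∈ acc, ∀ x ∈ l, y < x) → l.Pairwise (· < ·) →
    (l.foldl (fun acc x => PySem.List.insertBy (fun a b => decide (key a < key b)) x acc) acc).Pairwise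
      (fun a b => key a < key b ∨ (key a = key b ∧ a < b)) := by
  intro l
  induction l with
  | nil => intro acc h _ _; exact h
  | cons x l ih =>
    intro acc hacc hlt hpl
    have hx := (List.pairwise_cons.mp hpl).1
    rw [List.foldl_cons]
    apply ih
    · exact pv_insertBy_lex key x acc hacc (fun y hy => hlt y hy x (by simp))
    · intro y hy z hz
      rcases (PySem.List.mem_insertBy _ _ _ _).mp hy with h | h
      · rw [h]
        exact hx z hz
      · exact hlt y h z (by simp [hz])
    · exact (List.pairwise_cons.mp hpl).2

theorem pv_sorted_pyRange_lex (n : Int) (key : Int → Int) :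
    (PySem.List.sorted (PySem.List.pyRange 0 n) key false).Pairwise
      (fun a b => key a < key b ∨ (key a = key b ∧ a < b)) := by
  rw [PySem.List.sorted_eq_foldl_insertBy]
  exact pv_sorted_lex key _ [] (List.Pairwise.nil) (by simp)
    (PySem.List.pairwise_lt_pyRange_one 0 n)

theorem pv_fillsim (n : Nat) (cg : Nat → Int) (τ : List Nat)
    (hτp : τ.Perm (List.range n))
    (hlex : τ.Pairwise (fun a b => cg a < cg b ∨ (cg a = cg b ∧ a < b))) :
    ∀ (fuel k : Nat) (L T : Int),
      1 ≤ k → k ≤ n → n - k ≤ fuel →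
      (∀ i ∈ τ.take k, cg i ≤ L) → (∀ i ∈ τ.drop k, L ≤ cg i) → 0 ≤ T →
      ∃ (k' : Nat) (L' T' : Int),
        pvB_fill fuel (τ.map cg) (k : Int) L T = ((k' : Int), L', T') ∧
        1 ≤ k' ∧ k' ≤ n ∧ 0 ≤ T' ∧
        (∀ i ∈ τ.take k', cg i ≤ L') ∧
        (∀ i ∈ τ.drop k', L' ≤ cg i) ∧
        (k' = n ∨ (k' < n ∧ L' + PySem.Int.floordiv T' (k' : Int) < cg (τ.getD k' 0))) ∧
        pvStepF^[T.toNat] (pvCanon n cg τ k L) = pvStepF^[T'.toNat] (pvCanon n cg τ k' L') := by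
  have hτlen : τ.length = n := by simpa using hτp.length_eq
  have hlen2 : PySem.List.len (τ.map cg) = (n : Int) := by
    simp [PySem.List.len_eq, hτlen]
  have hget : ∀ j : Nat, j < n → (PySem.List.pyGet? (τ.map cg) (j : Int)).getD 0 = cg (τ.getD j 0) := by
    intro j hj
    have hjl : j < (τ.map cg).length := by
      rw [List.length_map, hτlen]
      omega
    rw [PySem.List.pyGet?_natCast, List.getElem?_eq_getElem hjl]
    simp only [Option.getD_some, List.getElem_map]
    rw [List.getD_eq_getElem τ 0 (by omega)]
  intro fuel
  induction fuel with
  | zero =>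
    intro k L T hk1 hkn hfuel hL hdrop hT
    have hkeq : k = n := by omega
    refine ⟨k, L, T, rfl, hk1, hkn, hT, hL, hdrop, Or.inl hkeq, rfl⟩
  | succ fuel ih =>
    intro k L T hk1 hkn hfuel hL hdrop hT
    by_cases hklt : k < n
    · have hkd : k < τ.length := by omega
      have hdropcons : τ.drop k = (τ[k]'hkd) :: τ.drop (k + 1) := List.drop_eq_getElem_cons hkd
      have hgetk : (PySem.List.pyGet? (τ.map cg) (k : Int)).getD 0 = cg (τ[k]'hkd) := by
        rw [hget k hklt, List.getD_eq_getElem τ 0 hkd]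
      have hsk_ge : L ≤ cg (τ[k]'hkd) := by
        apply hdrop
        rw [hdropcons]
        exact List.Mem.head _
      have hdroplex : ∀ i ∈ τ.drop (k + 1), cg (τ[k]'hkd) ≤ cg i := by
        intro i hi
        have hpw : (τ.drop k).Pairwise (fun a b => cg a < cg b ∨ (cg a = cg b ∧ a < b)) :=
          hlex.sublist (List.drop_sublist _ _)
        rw [hdropcons] at hpw
        have := (List.pairwise_cons.mp hpw).1 i hi
        rcases this with h | h
        · omega
        · omega
      by_cases hcond : cg (τ[k]'hkd) ≤ L + PySem.Int.floordiv T (k : Int)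
      · -- loop body runs: absorb class k after d complete rounds
        set d : Int := cg (τ[k]'hkd) - L with hd
        have hd0 : 0 ≤ d := by omega
        have hmul : d * (k : Int) ≤ T := by
          have h0k : (0 : Int) < (k : Int) := by exact_mod_cast hk1
          have := (PySem.Int.le_floordiv_iff_mul_le (a := T) (b := (k : Int)) (q := d) h0k).mpr
          by_contra hcon
          push_neg at hcon
          have h2 := (PySem.Int.le_floordiv_iff_mul_le (a := T) (b := (k : Int)) (q := d) h0k).mp
            (by omega)
          omega
        have hT2 : 0 ≤ T - (k : Int) * d := by nlinarith
        have hstep : pvB_fill (fuel + 1) (τ.map cg) (k : Int) L T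
            = pvB_fill fuel (τ.map cg) ((k : Int) + 1) (cg (τ[k]'hkd)) (T - (k : Int) * (cg (τ[k]'hkd) - L)) := by
          rw [pvB_fill]
          rw [if_pos ⟨by rw [hlen2]; exact_mod_cast hklt, by rw [hgetk]; exact hcond⟩]
          rw [hgetk]
        obtain ⟨k', L', T', hfill, h1, h2, h3, h4, h5, h6, h7⟩ :=
          ih (k + 1) (cg (τ[k]'hkd)) (T - (k : Int) * d) (by omega) (by omega) (by omega)
            (by
              intro i hi
              rw [List.take_add_one, List.getElem?_eq_getElem hkd] at hi
              rcases List.mem_append.mp hi with h | h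
              · have := hL i h
                omega
              · simp at h
                rw [h])
            (by
              intro i hi
              exact hdroplex i hi)
            hT2
        refine ⟨k', L', T', ?_, h1, h2, h3, h4, h5, h6, ?_⟩
        · have hc1 : ((k : Int) + 1) = (((k + 1 : Nat)) : Int) := by push_cast; ring
          rw [hstep, ← hd, hc1]
          exact hfill
        · have htn : T.toNat = (T - (k : Int) * d).toNat + d.toNat * k := by
            have : (0:Int) ≤ (k : Int) * d := by positivity
            have e : (d.toNat : Int) = d := Int.toNat_of_nonneg hd0
            zify
            rw [Int.toNat_of_nonneg hT2, Int.toNat_of_nonneg hT]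
            push_cast [e]
            ring
          rw [htn, Function.iterate_add_apply]
          have hrounds : pvStepF^[d.toNat * k] (pvCanon n cg τ k L) = pvCanon n cg τ k (L + d.toNat) := by
            apply pv_rounds n cg τ k hτp hlex (by omega) d.toNat L hL
            intro i hi
            have e : (d.toNat : Int) = d := Int.toNat_of_nonneg hd0
            rw [e, hd]
            rw [hdropcons] at hi
            rcases List.mem_cons.mp hi with h | h
            · rw [h]
              omega
            · have := hdroplex i h
              omega
          rw [hrounds]
          have he : L + (d.toNat : Int) = cg (τ[k]'hkd) := by
            rw [Int.toNat_of_nonneg hd0, hd]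
            ring
          rw [he]
          rw [pv_absorb n cg τ k (cg (τ[k]'hkd)) hτp hkd rfl]
          exact h7
      · -- guard fails on the count test: the loop exits here
        have hstep : pvB_fill (fuel + 1) (τ.map cg) (k : Int) L T = ((k : Int), L, T) := by
          rw [pvB_fill]
          rw [if_neg]
          intro hc
          rw [hgetk] at hc
          exact hcond hc.2
        refine ⟨k, L, T, hstep, hk1, hkn, hT, hL, hdrop, Or.inr ⟨hklt, ?_⟩, rfl⟩
        rw [List.getD_eq_getElem τ 0 hkd]
        omega
    · -- k = n: the k < n test fails, the loop exits here
      have hkeq : k = n := by omega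
      have hstep : pvB_fill (fuel + 1) (τ.map cg) (k : Int) L T = ((k : Int), L, T) := by
        rw [pvB_fill]
        rw [if_neg]
        intro hc
        rw [hlen2] at hc
        have := hc.1
        omega
      refine ⟨k, L, T, hstep, hk1, hkn, hT, hL, hdrop, Or.inl hkeq, rfl⟩

theorem pv_buildA_nodup : ∀ (cs : List Int) (l : List (Int × Int)),
    (l.map Prod.fst).Nodup → (((pvA_build ⟨l⟩ cs).items).map Prod.fst).Nodup := by
  intro cs
  induction cs with
  | nil => intro l h; exact h
  | cons c cs ih =>
    intro l h
    show (((pvA_build (if PySem.Dict.contains ⟨l⟩ c then ⟨l⟩ else PySem.Dict.insert ⟨l⟩ c 0) cs).items).map Prod.fst).Nodup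
    by_cases hc : PySem.Dict.contains (⟨l⟩ : PySem.Dict Int Int) c = true
    · rw [if_pos hc]
      exact ih l h
    · rw [if_neg hc]
      have hins : PySem.Dict.insert (⟨l⟩ : PySem.Dict Int Int) c 0 = ⟨l ++ [(c, 0)]⟩ := by
        simp only [PySem.Dict.insert, Bool.eq_false_iff.mpr hc, Bool.false_eq_true, if_false]
      rw [hins]
      apply ih
      rw [List.map_append]
      refine List.Nodup.append h (List.nodup_singleton _) ?_
      simp only [List.map_cons, List.map_nil, List.disjoint_singleton]
      intro hmem
      exact hc ((pv_contains_iff l c).mpr hmem)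

theorem pv_buildA_prefix : ∀ (cs : List Int) (l : List (Int × Int)),
    ∃ ex, (pvA_build ⟨l⟩ cs).items = l ++ ex := by
  intro cs
  induction cs with
  | nil => intro l; exact ⟨[], by simp [pvA_build]⟩
  | cons c cs ih =>
    intro l
    show ∃ ex, (pvA_build (if PySem.Dict.contains ⟨l⟩ c then ⟨l⟩ else PySem.Dict.insert ⟨l⟩ c 0) cs).items = l ++ ex
    by_cases hc : PySem.Dict.contains (⟨l⟩ : PySem.Dict Int Int) c = true
    · rw [if_pos hc]
      exact ih l
    · rw [if_neg hc]
      have hins : PySem.Dict.insert (⟨l⟩ : PySem.Dict Int Int) c 0 = ⟨l ++ [(c, 0)]⟩ := by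
        simp only [PySem.Dict.insert, Bool.eq_false_iff.mpr hc, Bool.false_eq_true, if_false]
      rw [hins]
      obtain ⟨ex, hex⟩ := ih (l ++ [(c, 0)])
      exact ⟨[(c, 0)] ++ ex, by rw [hex, List.append_assoc]⟩

theorem pv_foldl_set_len (v : Nat → Int) : ∀ (l : List Nat) (C : List Int),
    (l.foldl (fun C i => C.set i (v i)) C).length = C.length := by
  intro l
  induction l with
  | nil => intro C; rfl
  | cons i l ih =>
    intro C
    rw [List.foldl_cons, ih, List.length_set]

theorem pv_foldl_set_getD (v : Nat → Int) : ∀ (l : List Nat) (C : List Int) (j : Nat),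
    l.Nodup → (∀ i ∈ l, i < C.length) →
    (l.foldl (fun C i => C.set i (v i)) C).getD j 0
      = if j ∈ l then v j else C.getD j 0 := by
  intro l
  induction l with
  | nil => intro C j _ _; simp
  | cons i l ih =>
    intro C j hnd hb
    rw [List.foldl_cons, ih _ _ (List.nodup_cons.mp hnd).2
      (fun x hx => by rw [List.length_set]; exact hb x (by simp [hx]))]
    by_cases hj : j ∈ l
    · rw [if_pos hj, if_pos (by simp [hj])]
    · rw [if_neg hj]
      by_cases hji : j = i
      · rw [if_pos (by simp [hji]), hji,
          pv_getD_set_self C i (v i) (hb i (by simp))]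
      · rw [if_neg (by simp [hji, hj]), pv_getD_set_ne C j i (v i) 0 hji]

theorem pv_fold_out (items : List (Int × Int)) (g v : Nat → Int) :
    ∀ (l : List Nat) (C : List Int) (added : List (Int × Int)),
      (∀ i ∈ l, i < items.length) → C.length = items.length →
      (items.map Prod.fst).Nodup → l.Nodup →
      (∀ p ∈ added, ∀ i ∈ l, p.1 ≠ (items.map Prod.fst).getD i 0) →
      l.foldl (fun (st : PySem.Dict Int Int × PySem.Dict Int Int) i =>
          ((if 0 < g i then st.1.insert ((items.map Prod.fst).getD i 0) (g i) else st.1),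
           st.2.insert ((items.map Prod.fst).getD i 0) (v i)))
        (⟨added⟩, ⟨(items.map Prod.fst).zip C⟩)
      = (⟨added ++ (l.filter (fun i => decide (0 < g i))).map
            (fun i => ((items.map Prod.fst).getD i 0, g i))⟩,
         ⟨(items.map Prod.fst).zip (l.foldl (fun C i => C.set i (v i)) C)⟩) := by
  intro l
  induction l with
  | nil =>
    intro C added _ _ _ _ _
    simp
  | cons i l ih =>
    intro C added hb hlen hK hnd hfresh
    have hKlen : (items.map Prod.fst).length = items.length := List.length_map _
    have hi : i < (items.map Prod.fst).length := by
      rw [hKlen]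
      exact hb i (by simp)
    have hzip : PySem.Dict.insert ⟨(items.map Prod.fst).zip C⟩ ((items.map Prod.fst).getD i 0) (v i)
        = ⟨(items.map Prod.fst).zip (C.set i (v i))⟩ :=
      pv_zip_insert _ _ hK (by omega) i hi (v i)
    rw [List.foldl_cons, List.foldl_cons]
    by_cases hg : 0 < g i
    · have hcon : PySem.Dict.contains (⟨added⟩ : PySem.Dict Int Int) ((items.map Prod.fst).getD i 0) = false := by
        rw [Bool.eq_false_iff]
        intro hc
        obtain hsome := (pv_contains_iff added _).mp hc
        obtain ⟨p, hp, hpe⟩ := List.mem_map.mp hsome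
        exact hfresh p hp i (by simp) hpe
      have hins : PySem.Dict.insert (⟨added⟩ : PySem.Dict Int Int) ((items.map Prod.fst).getD i 0) (g i)
          = ⟨added ++ [((items.map Prod.fst).getD i 0, g i)]⟩ := by
        simp only [PySem.Dict.insert, hcon, Bool.false_eq_true, if_false]
      rw [if_pos hg, hins, hzip]
      rw [ih (C.set i (v i)) (added ++ [((items.map Prod.fst).getD i 0, g i)])
        (fun x hx => hb x (by simp [hx])) (by rw [List.length_set]; exact hlen) hK
        (List.nodup_cons.mp hnd).2 ?_]
      · rw [List.filter_cons_of_pos (by simpa using hg), List.map_cons, List.append_assoc]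
        rfl
      · intro p hp j hj
        rcases List.mem_append.mp hp with h | h
        · exact hfresh p h j (by simp [hj])
        · simp only [List.mem_singleton] at h
          rw [h]
          have hij : i ≠ j := fun hc => (List.nodup_cons.mp hnd).1 (hc ▸ hj)
          have hjlt : j < (items.map Prod.fst).length := by
            rw [hKlen]
            exact hb j (by simp [hj])
          intro hc
          exact hij ((pv_getD_inj _ hK hi hjlt).mp hc)
    · rw [if_neg hg, hzip]
      rw [ih (C.set i (v i)) added (fun x hx => hb x (by simp [hx]))
        (by rw [List.length_set]; exact hlen) hK (List.nodup_cons.mp hnd).2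
        (fun p hp j hj => hfresh p hp j (by simp [hj]))]
      rw [List.filter_cons_of_neg (by simpa using hg)]

theorem pv_finale_state (n : Nat) (cg : Nat → Int) (τ : List Nat) (k : Nat) (L T : Int)
    (hτp : τ.Perm (List.range n))
    (hlex : τ.Pairwise (fun a b => cg a < cg b ∨ (cg a = cg b ∧ a < b)))
    (hk1 : 1 ≤ k) (hkn : k ≤ n) (hT : 0 ≤ T)
    (hL : ∀ i ∈ τ.take k, cg i ≤ L)
    (hdrop : ∀ i ∈ τ.drop k, L ≤ cg i)
    (hexit : k = n ∨ (k < n ∧ L + PySem.Int.floordiv T (k : Int) < cg (τ.getD k 0))) :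
    pvStepF^[T.toNat] (pvCanon n cg τ k L)
      = (pvC n cg (τ.take k)
           ((PySem.List.sorted (τ.take k) (fun x => x) false).take (PySem.Int.mod T (k : Int)).toNat)
           (L + PySem.Int.floordiv T (k : Int)),
         pvA n cg (τ.take k)
           ((PySem.List.sorted (τ.take k) (fun x => x) false).take (PySem.Int.mod T (k : Int)).toNat)
           (L + PySem.Int.floordiv T (k : Int)),
         pvO cg (τ.take k)
           ((PySem.List.sorted (τ.take k) (fun x => x) false).take (PySem.Int.mod T (k : Int)).toNat)
           (L + PySem.Int.floordiv T (k : Int))) := by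
  have hτlen : τ.length = n := by simpa using hτp.length_eq
  have hk0 : (0 : Int) < (k : Int) := by exact_mod_cast hk1
  set q := PySem.Int.floordiv T (k : Int) with hqdef
  set r := PySem.Int.mod T (k : Int) with hrdef
  have hq0 : 0 ≤ q := by
    rw [hqdef, PySem.Int.floordiv_eq_ediv_of_pos hk0]
    exact Int.ediv_nonneg hT (by omega)
  have hr0 : 0 ≤ r := PySem.Int.mod_nonneg T hk0
  have hrk : r < (k : Int) := PySem.Int.mod_lt T hk0
  have hqr : q * (k : Int) + r = T := PySem.Int.floordiv_mul_add_mod T (k : Int)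
  have hstrict : ∀ i ∈ τ.drop k, L + q + 1 ≤ cg i := by
    rcases hexit with h | ⟨hklt, hlt⟩
    · intro i hi
      rw [List.drop_eq_nil_of_le (by omega)] at hi
      simp at hi
    · intro i hi
      have hkd : k < τ.length := by omega
      have hdropcons : τ.drop k = (τ[k]'hkd) :: τ.drop (k + 1) := List.drop_eq_getElem_cons hkd
      have hgete : τ.getD k 0 = τ[k]'hkd := List.getD_eq_getElem τ 0 hkd
      rw [hgete] at hlt
      rw [hdropcons] at hi
      rcases List.mem_cons.mp hi with h | h
      · rw [h]
        omega
      · have hpw : (τ.drop k).Pairwise (fun a b => cg a < cg b ∨ (cg a = cg b ∧ a < b)) :=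
          hlex.sublist (List.drop_sublist _ _)
        rw [hdropcons] at hpw
        have := (List.pairwise_cons.mp hpw).1 i h
        rcases this with h' | h'
        · omega
        · omega
  have htn : T.toNat = r.toNat + q.toNat * k := by
    have e1 : (q.toNat : Int) = q := Int.toNat_of_nonneg hq0
    have e2 : (r.toNat : Int) = r := Int.toNat_of_nonneg hr0
    have h3 : ((T.toNat : Int)) = ((r.toNat + q.toNat * k : Nat) : Int) := by
      rw [Int.toNat_of_nonneg hT]
      push_cast [e1, e2]
      linarith [hqr]
    exact_mod_cast h3
  rw [htn, Function.iterate_add_apply]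
  have hrounds : pvStepF^[q.toNat * k] (pvCanon n cg τ k L) = pvCanon n cg τ k (L + q.toNat) := by
    apply pv_rounds n cg τ k hτp hlex hkn q.toNat L hL
    intro i hi
    have := hstrict i hi
    have : (q.toNat : Int) = q := Int.toNat_of_nonneg hq0
    omega
  rw [hrounds]
  have hqq : L + (q.toNat : Int) = L + q := by
    rw [Int.toNat_of_nonneg hq0]
  rw [hqq]
  have hpart := pv_partial n cg τ k (L + q) hτp hlex hkn
    (fun i hi => by have := hL i hi; omega)
    (fun i hi => by have := hstrict i hi; omega)
    r.toNat (by omega)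
  exact hpart

theorem pv_eq_of_getD (l1 l2 : List Int) (hlen : l1.length = l2.length)
    (h : ∀ j, l1.getD j 0 = l2.getD j 0) : l1 = l2 := by
  apply List.ext_getElem hlen
  intro j h1 h2
  have := h j
  rwa [List.getD_eq_getElem _ _ h1, List.getD_eq_getElem _ _ h2] at this

theorem pv_asc_eq_of_mem {α : Type} [LinearOrder α] : ∀ (l1 l2 : List α),
    l1.Pairwise (· < ·) → l2.Pairwise (· < ·) → (∀ x, x ∈ l1 ↔ x ∈ l2) → l1 = l2 := by
  intro l1
  induction l1 with
  | nil =>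
    intro l2 _ _ hm
    cases l2 with
    | nil => rfl
    | cons y l2 => exact absurd ((hm y).mpr (by simp)) (by simp)
  | cons x l1 ih =>
    intro l2 h1 h2 hm
    cases l2 with
    | nil => exact absurd ((hm x).mp (by simp)) (by simp)
    | cons y l2 =>
      have hxy : x = y := by
        rcases List.mem_cons.mp ((hm x).mp (by simp)) with h | h
        · exact h
        · have hyx : y < x := (List.pairwise_cons.mp h2).1 x h
          rcases List.mem_cons.mp ((hm y).mpr (by simp)) with h' | h'
          · exact absurd (h' ▸ hyx) (lt_irrefl x)
          · have := (List.pairwise_cons.mp h1).1 y h'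
            exact absurd hyx (by exact lt_asymm this)
      subst hxy
      congr 1
      apply ih l2 (List.pairwise_cons.mp h1).2 (List.pairwise_cons.mp h2).2
      intro z
      constructor
      · intro hz
        have hxz : x < z := (List.pairwise_cons.mp h1).1 z hz
        rcases List.mem_cons.mp ((hm z).mp (by simp [hz])) with h | h
        · exact absurd (h ▸ hxz) (lt_irrefl _)
        · exact h
      · intro hz
        have hxz : x < z := (List.pairwise_cons.mp h2).1 z hz
        rcases List.mem_cons.mp ((hm z).mpr (by simp [hz])) with h | h
        · exact absurd (h ▸ hxz) (lt_irrefl _)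
        · exact h

theorem pv_finish_out (items : List (Int × Int)) (n : Nat) (cg : Nat → Int) (τ : List Nat)
    (σ : List Int) (k : Nat) (L T : Int)
    (hn : items.length = n)
    (hK : (items.map Prod.fst).Nodup)
    (hcg : ∀ j : Nat, cg j = (items.map Prod.snd).getD j 0)
    (hτp : τ.Perm (List.range n))
    (hlex : τ.Pairwise (fun a b => cg a < cg b ∨ (cg a = cg b ∧ a < b)))
    (hσ : σ = τ.map (fun j : Nat => (j : Int)))
    (hk1 : 1 ≤ k) (hkn : k ≤ n) (hT : 0 ≤ T)
    (hL : ∀ i ∈ τ.take k, cg i ≤ L) :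
    pvB_finish items σ ⟨items⟩ ((k : Int), L, T)
      = pvG_fin (items.map Prod.fst)
          (pvC n cg (τ.take k)
             ((PySem.List.sorted (τ.take k) (fun x => x) false).take (PySem.Int.mod T (k : Int)).toNat)
             (L + PySem.Int.floordiv T (k : Int)),
           pvA n cg (τ.take k)
             ((PySem.List.sorted (τ.take k) (fun x => x) false).take (PySem.Int.mod T (k : Int)).toNat)
             (L + PySem.Int.floordiv T (k : Int)),
           pvO cg (τ.take k)
             ((PySem.List.sorted (τ.take k) (fun x => x) false).take (PySem.Int.mod T (k : Int)).toNat)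
             (L + PySem.Int.floordiv T (k : Int))) := by
  have hτlen : τ.length = n := by simpa using hτp.length_eq
  have hτnd : τ.Nodup := hτp.nodup_iff.mpr List.nodup_range
  have hτbound : ∀ i ∈ τ, i < n := by
    intro i hi
    have := hτp.mem_iff.mp hi
    simpa using this
  have hk0 : (0 : Int) < (k : Int) := by exact_mod_cast hk1
  have hq0 : 0 ≤ PySem.Int.floordiv T (k : Int) := by
    rw [PySem.Int.floordiv_eq_ediv_of_pos hk0]
    exact Int.ediv_nonneg hT (by omega)
  have hr0 : 0 ≤ PySem.Int.mod T (k : Int) := PySem.Int.mod_nonneg T hk0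
  have hprefnd : (τ.take k).Nodup := hτnd.sublist (List.take_sublist _ _)
  have hpreflex : (τ.take k).Pairwise (fun a b => cg a < cg b ∨ (cg a = cg b ∧ a < b)) :=
    hlex.sublist (List.take_sublist _ _)
  have hQperm : (PySem.List.sorted (τ.take k) (fun x => x) false).Perm (τ.take k) :=
    PySem.List.sorted_perm _ _ _
  have hQpw : (PySem.List.sorted (τ.take k) (fun x => x) false).Pairwise (· < ·) :=
    pv_sortedQ_pairwise _ hprefnd
  set Lf := L + PySem.Int.floordiv T (k : Int) with hLfdef
  set rr := (PySem.Int.mod T (k : Int)).toNat with hrrdef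
  set Q := PySem.List.sorted (τ.take k) (fun x => x) false with hQdef
  set QT := Q.take rr with hQTdef
  have hQTpw : QT.Pairwise (· < ·) := hQpw.sublist (List.take_sublist _ _)
  have hQTsub : ∀ i ∈ QT, i ∈ τ.take k := fun i hi =>
    hQperm.mem_iff.mp (List.mem_of_mem_take hi)
  have hLLf : ∀ i ∈ τ.take k, cg i ≤ Lf := by
    intro i hi
    have := hL i hi
    omega
  set g : Nat → Int := fun j => Lf - cg j + (if j ∈ QT then 1 else 0) with hgdef
  set v : Nat → Int := fun j => cg j + g j with hvdef
  have hitem : ∀ j ∈ τ.take k, (PySem.List.pyGet? items ((j : Nat) : Int)).getD (0, 0)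
      = ((items.map Prod.fst).getD j 0, cg j) := by
    intro j hj
    have hjn : j < n := hτbound j (List.mem_of_mem_take hj)
    have hjl : j < items.length := by omega
    rw [PySem.List.pyGet?_natCast, List.getElem?_eq_getElem hjl, Option.getD_some]
    have e1 : (items.map Prod.fst).getD j 0 = items[j].1 := by
      rw [List.getD_eq_getElem _ _ (by simpa using hjl), List.getElem_map]
    have e2 : cg j = items[j].2 := by
      rw [hcg, List.getD_eq_getElem _ _ (by simpa using hjl), List.getElem_map]
    rw [e1, e2]
  have hzip : (items.map Prod.fst).zip (items.map Prod.snd) = items := by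
    rw [List.zip_map']
    simp
  -- the slices: idx_sorted[:k] and active[:r]
  have hslice1 : PySem.List.slice σ none (some ((k : Nat) : Int)) = (τ.take k).map (fun j : Nat => (j : Int)) := by
    rw [PySem.List.slice_to_natCast, hσ, List.map_take]
  have hcastpw : ((Q.map (fun j : Nat => (j : Int)))).Pairwise (· < ·) := by
    rw [List.pairwise_map]
    exact hQpw.imp (fun h => by exact_mod_cast h)
  have hact : PySem.List.sorted ((τ.take k).map (fun j : Nat => (j : Int))) (fun x => x) false
      = Q.map (fun j : Nat => (j : Int)) := by
    apply pv_asc_eq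
    · apply pv_sortedQ_pairwise
      exact hprefnd.map (fun a b h => by exact_mod_cast h)
    · exact hcastpw
    · exact (hQperm.map _).trans (PySem.List.sorted_perm _ _ _).symm
  have hslice2 : PySem.List.slice (Q.map (fun j : Nat => (j : Int))) none (some (PySem.Int.mod T (k : Int)))
      = QT.map (fun j : Nat => (j : Int)) := by
    rw [PySem.List.slice_to _ hr0, List.map_take]
  have hcontains : ∀ j : Nat,
      (PySem.Set.ofList (QT.map (fun i : Nat => (i : Int)))).contains ((j : Nat) : Int)
        = decide (j ∈ QT) := by
    intro j
    have h1 : (((j : Nat) : Int) ∈ PySem.Set.ofList (QT.map (fun i : Nat => (i : Int)))) ↔ j ∈ QT := by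
      rw [PySem.Set.mem_ofList]
      constructor
      · intro h
        obtain ⟨x, hx, he⟩ := List.mem_map.mp h
        have : x = j := by exact_mod_cast he
        exact this ▸ hx
      · intro h
        exact List.mem_map.mpr ⟨j, h, rfl⟩
    simp [PySem.Set.contains, h1]
  -- unfold the port's finishing pass and normalise it onto Nat indices
  unfold pvB_finish
  simp only [hslice1, hact, hslice2]
  rw [List.foldl_map]
  have hbody : (List.take k τ).foldl
      (fun (x : PySem.Dict Int Int × PySem.Dict Int Int) (y : Nat) =>
        (if 0 < L + PySem.Int.floordiv T ↑k - ((PySem.List.pyGet? items ↑y).getD (0, 0)).2 +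
              (if (PySem.Set.ofList (List.map (fun j : Nat => (j : Int)) QT)).contains ↑y = true then 1 else 0) then
            x.1.insert ((PySem.List.pyGet? items ↑y).getD (0, 0)).1
              (L + PySem.Int.floordiv T ↑k - ((PySem.List.pyGet? items ↑y).getD (0, 0)).2 +
                (if (PySem.Set.ofList (List.map (fun j : Nat => (j : Int)) QT)).contains ↑y = true then 1 else 0))
          else x.1,
          x.2.insert ((PySem.List.pyGet? items ↑y).getD (0, 0)).1
            (((PySem.List.pyGet? items ↑y).getD (0, 0)).2 +
              (L + PySem.Int.floordiv T ↑k - ((PySem.List.pyGet? items ↑y).getD (0, 0)).2 +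
                (if (PySem.Set.ofList (List.map (fun j : Nat => (j : Int)) QT)).contains ↑y = true then 1 else 0)))))
      ((⟨[]⟩ : PySem.Dict Int Int), (⟨items⟩ : PySem.Dict Int Int))
      = (List.take k τ).foldl
      (fun (st : PySem.Dict Int Int × PySem.Dict Int Int) (j : Nat) =>
        ((if 0 < g j then st.1.insert ((items.map Prod.fst).getD j 0) (g j) else st.1),
         st.2.insert ((items.map Prod.fst).getD j 0) (v j)))
      ((⟨[]⟩ : PySem.Dict Int Int), (⟨items⟩ : PySem.Dict Int Int)) := by
    apply PySem.List.foldl_congr_mem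
    intro acc j hj
    rw [hitem j hj, hcontains j]
    simp only [decide_eq_true_eq, hgdef, hvdef, hLfdef]
  rw [hbody]
  rw [show ({ items := items } : PySem.Dict Int Int)
      = (⟨(items.map Prod.fst).zip (items.map Prod.snd)⟩ : PySem.Dict Int Int) from by rw [hzip]]
  rw [pv_fold_out items g v (τ.take k) (items.map Prod.snd) []
    (fun i hi => by rw [hn]; exact hτbound i (List.mem_of_mem_take hi))
    (by simp) hK hprefnd (by intro p hp; simp at hp)]
  have hfeq : (τ.take k).filter (fun i => decide (0 < g i)) = pvO cg (τ.take k) QT Lf := by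
    have hc1 : (τ.take k).filter (fun i => decide (0 < g i))
        = (τ.take k).filter (fun i => decide (cg i < Lf) || (decide (cg i = Lf) && decide (i ∈ QT))) := by
      apply List.filter_congr
      intro i hi
      have hle := hLLf i hi
      by_cases hm : i ∈ QT
      · have hg : g i = Lf - cg i + 1 := by simp [hgdef, hm]
        have h1 : (0 < g i) := by omega
        by_cases h2 : cg i < Lf
        · simp [h1, h2]
        · have h3 : cg i = Lf := by omega
          simp [h1, h2, h3, hm]
      · have hg : g i = Lf - cg i := by simp [hgdef, hm]
        by_cases h2 : cg i < Lf
        · have h1 : (0 < g i) := by omega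
          simp [h1, h2]
        · have h1 : ¬ (0 < g i) := by omega
          simp [h1, h2, hm]
    rw [hc1, pv_lex_split cg Lf (fun i => decide (i ∈ QT)) (τ.take k) hpreflex]
    unfold pvO
    congr 1
    apply pv_asc_eq_of_mem
    · exact pv_filter_eqL_pairwise cg Lf (fun i => decide (i ∈ QT)) (τ.take k) hpreflex
    · exact hQTpw.filter _
    · intro x
      simp only [List.mem_filter, Bool.and_eq_true, decide_eq_true_eq]
      constructor
      · rintro ⟨hxp, hxe, hxm⟩
        exact ⟨hxm, hxe⟩
      · rintro ⟨hxm, hxe⟩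
        exact ⟨hQTsub x hxm, hxe, hxm⟩
  have horder : ((τ.take k).filter (fun i => decide (0 < g i))).map
        (fun i => ((items.map Prod.fst).getD i 0, g i))
      = (pvO cg (τ.take k) QT Lf).map
        (fun i => ((items.map Prod.fst).getD i 0, (pvA n cg (τ.take k) QT Lf).getD i 0)) := by
    rw [hfeq]
    apply List.map_congr_left
    intro i hi
    have hip : i ∈ τ.take k := by
      unfold pvO at hi
      rcases List.mem_append.mp hi with h | h
      · exact List.mem_of_mem_filter h
      · exact hQTsub i (List.mem_of_mem_filter h)
    have hin : i < n := hτbound i (List.mem_of_mem_take hip)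
    have hval : (pvA n cg (τ.take k) QT Lf).getD i 0 = g i := by
      unfold pvA
      rw [pv_getD_mapRange, if_pos hin]
      by_cases hm : i ∈ QT
      · simp [hm, hgdef]
      · simp [hm, hip, hgdef]
    rw [hval]
  have hCfin : (τ.take k).foldl (fun C i => C.set i (v i)) (items.map Prod.snd)
      = pvC n cg (τ.take k) QT Lf := by
    apply pv_eq_of_getD
    · rw [pv_foldl_set_len]
      unfold pvC
      simp [hn]
    · intro j
      rw [pv_foldl_set_getD v _ _ j hprefnd
        (fun i hi => by rw [List.length_map, hn]; exact hτbound i (List.mem_of_mem_take hi))]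
      unfold pvC
      rw [pv_getD_mapRange]
      by_cases hj : j ∈ τ.take k
      · have hjn : j < n := hτbound j (List.mem_of_mem_take hj)
        rw [if_pos hj, if_pos hjn]
        by_cases hm : j ∈ QT
        · simp [hm, hvdef, hgdef]
          try ring
        · simp [hm, hj, hvdef, hgdef]
          try ring
      · rw [if_neg hj]
        by_cases hjn : j < n
        · rw [if_pos hjn, if_neg (fun hc => hj (hQTsub j hc)), if_neg hj]
          rw [hcg]
        · rw [if_neg hjn, List.getD_eq_default]
          rw [List.length_map]
          omega
  refine Prod.ext ?_ ?_
  · show [] ++ ((τ.take k).filter (fun i => decide (0 < g i))).map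
        (fun i => ((items.map Prod.fst).getD i 0, g i))
      = (pvO cg (τ.take k) QT Lf).map
        (fun i => ((items.map Prod.fst).getD i 0, (pvA n cg (τ.take k) QT Lf).getD i 0))
    rw [List.nil_append, horder]
  · show (items.map Prod.fst).zip ((τ.take k).foldl (fun C i => C.set i (v i)) (items.map Prod.snd))
      = (items.map Prod.fst).zip (pvC n cg (τ.take k) QT Lf)
    rw [hCfin]

set_option maxHeartbeats 2000000 in
theorem pv_main (img_per_class : List (Int × Int)) (total_additional_imgs : Int) (n_class : Int) (start : Int)
    (hnd : (img_per_class.map Prod.fst).Nodup)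
    (hne : img_per_class ≠ [] ∨ start < n_class) :
    balance_classes img_per_class total_additional_imgs n_class start
      = balance_classes_alt img_per_class total_additional_imgs n_class start := by
  set T := total_additional_imgs with hTdef
  set items := (pvA_build ⟨img_per_class⟩ (PySem.List.pyRange start n_class)).items with hitems
  have hKnd : (items.map Prod.fst).Nodup := pv_buildA_nodup _ _ hnd
  have hitemsne : items ≠ [] := by
    rcases hne with h | h
    · obtain ⟨ex, hex⟩ := pv_buildA_prefix (PySem.List.pyRange start n_class) img_per_class
      rw [hitems, hex]
      simp [h]
    · rcases eq_or_ne img_per_class [] with rfl | h'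
      · rw [hitems, PySem.List.pyRange_one_cons h]
        show (pvA_build (if PySem.Dict.contains ⟨[]⟩ start then ⟨[]⟩ else PySem.Dict.insert ⟨[]⟩ start 0)
          (PySem.List.pyRange (start + 1) n_class)).items ≠ []
        rw [if_neg (by simp [PySem.Dict.contains])]
        have hins : PySem.Dict.insert (⟨[]⟩ : PySem.Dict Int Int) start 0 = ⟨[(start, 0)]⟩ := by
          simp [PySem.Dict.insert, PySem.Dict.contains]
        rw [hins]
        obtain ⟨ex, hex⟩ := pv_buildA_prefix (PySem.List.pyRange (start + 1) n_class) [(start, 0)]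
        rw [hex]
        simp
      · obtain ⟨ex, hex⟩ := pv_buildA_prefix (PySem.List.pyRange start n_class) img_per_class
        rw [hitems, hex]
        simp [h']
  set n := items.length with hn
  have hn1 : 1 ≤ n := by
    rw [hn]
    exact List.length_pos_iff.mpr hitemsne
  set cg : Nat → Int := fun j => (items.map Prod.snd).getD j 0 with hcgdef
  have hzip : (items.map Prod.fst).zip (items.map Prod.snd) = items := by
    rw [List.zip_map']
    simp
  have hrep : ∀ i, (List.replicate n (0 : Int)).getD i 0 = 0 := by
    intro i
    rcases lt_or_ge i n with hi | hi
    · exact List.getD_replicate _ hi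
    · exact List.getD_eq_default _ _ (by simpa using hi)
  have hA : balance_classes img_per_class T n_class start
      = pvG_fin (items.map Prod.fst)
          (pvStepF^[T.toNat] (items.map Prod.snd, List.replicate n 0, [])) := by
    have h := pv_loop_eq (items.map Prod.fst) hKnd (by simpa using hitemsne) T.toNat
      (items.map Prod.snd) (List.replicate n 0) [] T
      (by simp) (by simp [hn]) (by intro i hi; simp at hi) List.nodup_nil
      (by intro i; simp [hrep i])
      (by intro i; simp [hrep i])
      (by intro hfz; omega)
    rw [hzip] at h
    rw [← pvG_loop_iter]
    show ((pvA_loop T.toNat ⟨[]⟩ (pvA_build ⟨img_per_class⟩ (PySem.List.pyRange start n_class)) T).1.items,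
          (pvA_loop T.toNat ⟨[]⟩ (pvA_build ⟨img_per_class⟩ (PySem.List.pyRange start n_class)) T).2.items)
        = pvG_loop T.toNat (items.map Prod.fst) (items.map Prod.snd) (List.replicate n 0) []
    exact h
  by_cases hT0 : T ≤ 0
  · have htz : T.toNat = 0 := by omega
    rw [hA, htz]
    show pvG_fin (items.map Prod.fst) (items.map Prod.snd, List.replicate n 0, [])
      = balance_classes_alt img_per_class T n_class start
    have hBz : balance_classes_alt img_per_class T n_class start = ([], items) := by
      show (if T ≤ 0 then (([] : List (Int × Int)), items) else _) = ([], items)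
      rw [if_pos hT0]
    rw [hBz]
    show (([] : List Nat).map _, (items.map Prod.fst).zip (items.map Prod.snd)) = ([], items)
    rw [hzip, List.map_nil]
  · have hT1 : 1 ≤ T := by omega
    set key : Int → Int := fun i => ((PySem.List.pyGet? items i).getD (0, 0)).2 with hkeydef
    have hlenitems : PySem.List.len items = (n : Int) := by
      simp [PySem.List.len_eq, hn]
    set σ := PySem.List.sorted (PySem.List.pyRange 0 (PySem.List.len items)) key false with hσdef
    have hrange : PySem.List.pyRange 0 (PySem.List.len items) = (List.range n).map (fun j : Nat => (j : Int)) := by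
      rw [hlenitems, PySem.List.pyRange_one]
      simp
    have hσperm : σ.Perm ((List.range n).map (fun j : Nat => (j : Int))) := by
      rw [hσdef, hrange]
      exact PySem.List.sorted_perm _ _ _
    have hσbound : ∀ e ∈ σ, 0 ≤ e ∧ e < (n : Int) := by
      intro e he
      have hm := hσperm.mem_iff.mp he
      obtain ⟨j, hj, rfl⟩ := List.mem_map.mp hm
      have hjr := List.mem_range.mp hj
      constructor
      · positivity
      · exact_mod_cast hjr
    set τ := σ.map Int.toNat with hτdef
    have hστ : σ = τ.map (fun j : Nat => (j : Int)) := by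
      rw [hτdef, List.map_map]
      conv_lhs => rw [← List.map_id σ]
      apply List.map_congr_left
      intro e he
      have := (hσbound e he).1
      simp [Int.toNat_of_nonneg this]
    have hτp : τ.Perm (List.range n) := by
      have h := hσperm.map Int.toNat
      rw [List.map_map] at h
      rw [hτdef]
      refine h.trans ?_
      have hfun : (Int.toNat ∘ fun j : Nat => (j : Int)) = id := by
        funext j
        simp
      rw [hfun, List.map_id]
    have hτlen : τ.length = n := by simpa using hτp.length_eq
    have hτnd : τ.Nodup := hτp.nodup_iff.mpr List.nodup_range
    have hkeycg : ∀ e ∈ σ, key e = cg e.toNat := by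
      intro e he
      obtain ⟨h0, hlt⟩ := hσbound e he
      have hjl : e.toNat < items.length := by
        rw [← hn]
        omega
      rw [hkeydef]
      show ((PySem.List.pyGet? items e).getD (0, 0)).2 = cg e.toNat
      rw [show e = ((e.toNat : Nat) : Int) from (Int.toNat_of_nonneg h0).symm,
        PySem.List.pyGet?_natCast, List.getElem?_eq_getElem hjl, Option.getD_some]
      rw [hcgdef]
      show items[e.toNat].2 = (items.map Prod.snd).getD e.toNat 0
      rw [List.getD_eq_getElem _ _ (by simpa using hjl), List.getElem_map]
    have hlexσ : σ.Pairwise (fun a b => key a < key b ∨ (key a = key b ∧ a < b)) := by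
      rw [hσdef, hlenitems]
      exact pv_sorted_pyRange_lex (n : Int) key
    have hlexτ : τ.Pairwise (fun a b => cg a < cg b ∨ (cg a = cg b ∧ a < b)) := by
      rw [hτdef, List.pairwise_map]
      refine List.Pairwise.imp_of_mem ?_ hlexσ
      intro a b ha hb hr
      have e1 := hkeycg a ha
      have e2 := hkeycg b hb
      obtain ⟨h0a, _⟩ := hσbound a ha
      obtain ⟨h0b, _⟩ := hσbound b hb
      rcases hr with h | h
      · left
        rw [← e1, ← e2]
        exact h
      · right
        refine ⟨by rw [← e1, ← e2]; exact h.1, ?_⟩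
        omega
    have h0τ : 0 < τ.length := by omega
    have htake1 : τ.take 1 = [τ[0]'h0τ] := by
      rw [show (1 : Nat) = 0 + 1 from rfl, List.take_add_one, List.getElem?_eq_getElem h0τ]
      rfl
    have hgete0 : τ.getD 0 0 = τ[0]'h0τ := List.getD_eq_getElem τ 0 h0τ
    set L0 := cg (τ.getD 0 0) with hL0def
    have hinit : ((items.map Prod.snd), List.replicate n 0, ([] : List Nat)) = pvCanon n cg τ 1 L0 := by
      unfold pvCanon
      refine Prod.ext ?_ (Prod.ext ?_ ?_)
      · unfold pvC
        apply pv_eq_of_getD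
        · simp [hn]
        · intro j
          rw [pv_getD_mapRange]
          by_cases hjn : j < n
          · rw [if_pos hjn, htake1]
            by_cases hj0 : j ∈ [τ[0]'h0τ]
            · rw [if_pos hj0]
              simp only [List.mem_singleton] at hj0
              rw [hL0def, hgete0, hj0, hcgdef]
              simp
            · rw [if_neg hj0, hcgdef]
              simp
          · rw [if_neg hjn, List.getD_eq_default _ _ (by simp [hn]; omega)]
      · unfold pvA
        apply pv_eq_of_getD
        · simp
        · intro j
          rw [pv_getD_mapRange, hrep j]
          by_cases hjn : j < n
          · rw [if_pos hjn, htake1]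
            by_cases hj0 : j ∈ [τ[0]'h0τ]
            · rw [if_pos hj0]
              simp only [List.mem_singleton] at hj0
              rw [hj0, hL0def, hgete0]
              simp
            · rw [if_neg hj0]
              simp
          · rw [if_neg hjn]
      · unfold pvO
        rw [htake1]
        have hf : List.filter (fun i => decide (cg i < L0)) [τ[0]'h0τ] = [] := by
          have hnlt : ¬ (cg (τ[0]'h0τ) < L0) := by
            rw [hL0def, hgete0]
            omega
          simp [hnlt]
        rw [hf]
        simp
    have hL1 : ∀ i ∈ τ.take 1, cg i ≤ L0 := by
      intro i hi
      rw [htake1] at hi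
      simp only [List.mem_singleton] at hi
      subst hi
      rw [hL0def]
      exact le_of_eq (congrArg cg hgete0).symm
    have hcons : τ = τ[0]'h0τ :: τ.drop 1 := by
      conv_lhs => rw [← List.take_append_drop 1 τ]
      rw [htake1]
      rfl
    have hdrop1 : ∀ i ∈ τ.drop 1, L0 ≤ cg i := by
      intro i hi
      have hpw2 : ((τ[0]'h0τ) :: τ.drop 1).Pairwise
          (fun a b => cg a < cg b ∨ (cg a = cg b ∧ a < b)) := hcons ▸ hlexτ
      have h := (List.pairwise_cons.mp hpw2).1 i hi
      rw [hL0def, hgete0]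
      rcases h with h | h
      · omega
      · omega
    obtain ⟨k', L', T', hfill, h1, h2, h3, h4, h5, h6, h7⟩ :=
      pv_fillsim n cg τ hτp hlexτ n 1 L0 T (le_refl 1) hn1 (by omega) hL1 hdrop1 (by omega)
    have hcnt : σ.map key = τ.map cg := by
      rw [hστ, List.map_map]
      apply List.map_congr_left
      intro j hj
      have hjσ : ((j : Nat) : Int) ∈ σ := by
        rw [hστ]
        exact List.mem_map.mpr ⟨j, hj, rfl⟩
      have := hkeycg _ hjσ
      simpa using this
    have hcntlen : (σ.map key).length = n := by
      rw [hcnt, List.length_map, hτlen]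
    have hfirst : (PySem.List.pyGet? (τ.map cg) 0).getD 0 = L0 := by
      rw [show (0 : Int) = ((0 : Nat) : Int) from rfl, PySem.List.pyGet?_natCast]
      rw [List.getElem?_eq_getElem (by rw [List.length_map, hτlen]; omega)]
      rw [Option.getD_some, List.getElem_map, hL0def, hgete0]
    have hBalt : balance_classes_alt img_per_class T n_class start
        = pvB_finish items σ (⟨items⟩ : PySem.Dict Int Int)
            (pvB_fill (σ.map key).length (σ.map key) 1
              ((PySem.List.pyGet? (σ.map key) 0).getD 0) T) := by
      show (if T ≤ 0 then (([] : List (Int × Int)), items)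
        else pvB_finish items σ ⟨items⟩
          (pvB_fill (σ.map key).length (σ.map key) 1
            ((PySem.List.pyGet? (σ.map key) 0).getD 0) T)) = _
      rw [if_neg hT0]
    rw [Nat.cast_one] at hfill
    rw [hA, hinit, h7,
      pv_finale_state n cg τ k' L' T' hτp hlexτ h1 h2 h3 h4 h5 h6,
      hBalt, hcnt, hfirst,
      show (τ.map cg).length = n from by rw [List.length_map, hτlen],
      hfill,
      pv_finish_out items n cg τ σ k' L' T' hn.symm hKnd (fun j => by rw [hcgdef])
        hτp hlexτ hστ h1 h2 h3 h4]

-- ===== VERDICT (by name: the statement is the Claim_ definition above) =====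
theorem balance_classes_spec : Claim_equal_balance_classes := by
  intro img_per_class total_additional_imgs n_class start _ hpre
  unfold Spec_balance_classes
  exact pv_main img_per_class total_additional_imgs n_class start hpre.1 hpre.2
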